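-- pv_equiv track=rewrite | github.com/K1mcheee/the-chase | backend/algorithm.py | lossless_chase
-- ===== SOURCE A (Python) =====
-- def lossless_table(attrs, decom):
--     res = []
--     for i, d in enumerate(decom, start=1):
--         row = {attr: "X" if attr in d else f"{attr}{i}" for attr in attrs}
--         res.append(row)
--     return res
--
-- def lossless_chase(attrs, FD, decom):
--
--     tbl = lossless_table(sorted(attrs), decom)
--     changed = True
--
--     while changed:
--         changed = False
--         for lhs, rhs in FD:
--             for i, row_i in enumerate(tbl):
--                 for j, row_j in enumerate(tbl):
--                     if i >= j:
--                         continue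
--
--                     lhs_match = all(row_i[attr] == row_j[attr] for attr in lhs)
--
--                     if not lhs_match:
--                         continue
--
--                     for attr in rhs:
--                         if row_i[attr] == "X" and row_j[attr] != "X":
--                             row_j[attr] = "X"
--                             changed = True
--                         elif row_j[attr] == "X" and row_i[attr] != "X":
--                             row_i[attr] = "X"
--                             changed = True
--
--         if any(all(v == "X" for v in row.values()) for row in tbl):
--             return (True, tbl)
--
--     return (False, tbl)
-- ===== SOURCE B (Python) =====
-- def lossless_chase(attrs, FD, decom):
--     # Chase on sets-of-X per row: per FD, rows whose lhs is all-X form one group;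
--     # the group's rows jointly receive every rhs attribute any of them marks X.
--     keys = list(dict.fromkeys(sorted(attrs)))
--     xsets = [{a for a in keys if a in d} for d in decom]
--     changed = True
--     while changed:
--         changed = False
--         for lhs, rhs in FD:
--             group = [i for i, x in enumerate(xsets) if all(a in x for a in lhs)]
--             if len(group) >= 2:
--                 gained = {a for a in rhs if any(a in xsets[i] for i in group)}
--                 for i in group:
--                     if not gained <= xsets[i]:
--                         xsets[i] = xsets[i] | gained
--                         changed = True
--         if any(all(a in x for a in keys) for x in xsets):
--             return (True, _chase_table(keys, xsets))
--     return (False, _chase_table(keys, xsets))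
--
-- def _chase_table(keys, xsets):
--     return [{a: ("X" if a in x else f"{a}{i}") for a in keys}
--             for i, x in enumerate(xsets, start=1)]
-- ===== Notes on version B (the rewrite author's own statement) =====
-- stated objective: faster
-- what changed: B replaces A's repeated all-pairs row comparisons on a table of tag strings by a chase over per-row sets of X-marked attributes: per FD it groups the rows whose lhs is all X and gives the whole group the union of their X-marked rhs attributes in one pass, rebuilding the string table only once at the end.
import Mathlib
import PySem

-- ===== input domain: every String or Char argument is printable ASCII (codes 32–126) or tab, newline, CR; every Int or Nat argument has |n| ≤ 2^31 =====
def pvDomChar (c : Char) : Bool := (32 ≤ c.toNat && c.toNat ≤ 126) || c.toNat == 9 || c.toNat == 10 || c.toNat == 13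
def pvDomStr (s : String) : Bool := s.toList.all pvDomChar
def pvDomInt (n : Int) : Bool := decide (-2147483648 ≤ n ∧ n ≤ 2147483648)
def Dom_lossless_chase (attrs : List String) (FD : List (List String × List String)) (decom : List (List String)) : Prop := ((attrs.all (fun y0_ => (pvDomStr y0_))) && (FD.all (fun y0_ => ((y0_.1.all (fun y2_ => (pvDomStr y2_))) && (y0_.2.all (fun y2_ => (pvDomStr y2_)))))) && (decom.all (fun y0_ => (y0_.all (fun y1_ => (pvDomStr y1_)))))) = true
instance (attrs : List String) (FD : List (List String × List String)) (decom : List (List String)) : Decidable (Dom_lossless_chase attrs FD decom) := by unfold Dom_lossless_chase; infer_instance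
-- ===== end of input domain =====

-- B replaces A's all-pairs rescans of a string table by per-FD group propagation on
-- per-row sets of X-marked attributes (objective: faster).

-- ===== PORT A =====
-- row = {attr: "X" if attr in d else f"{attr}{i}" for attr in attrs}
def pvRowA (sa : List String) (i : Int) (d : List String) : PySem.Dict String String :=
  sa.foldl (fun r a => r.insert a (if a ∈ d then "X" else a ++ PySem.Int.toStr i)) PySem.Dict.empty

-- lossless_table(attrs, decom)
def pvTableA (sa : List String) (decom : List (List String)) : List (PySem.Dict String String) :=
  (PySem.List.enumerate decom 1).foldl (fun res p => res ++ [pvRowA sa p.1 p.2]) []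

-- the body of `for attr in rhs: …` (row_i[attr] read as getD with default ""; exact whenever
-- the key is present, which Pre_ guarantees — Python raises KeyError otherwise)
def pvRhsStepA (i j : Nat) (st : List (PySem.Dict String String) × Bool) (a : String) :
    List (PySem.Dict String String) × Bool :=
  let ri := st.1.getD i PySem.Dict.empty
  let rj := st.1.getD j PySem.Dict.empty
  if ri.getD a "" = "X" ∧ ¬ rj.getD a "" = "X" then (st.1.set j (rj.insert a "X"), true)
  else if rj.getD a "" = "X" ∧ ¬ ri.getD a "" = "X" then (st.1.set i (ri.insert a "X"), true)
  else st

-- one (i, j) iteration of the two nested `for … in enumerate(tbl)` loops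
def pvPairStepA (lhs rhs : List String) (st : List (PySem.Dict String String) × Bool) (i j : Nat) :
    List (PySem.Dict String String) × Bool :=
  if j ≤ i then st
  else
    let ri := st.1.getD i PySem.Dict.empty
    let rj := st.1.getD j PySem.Dict.empty
    if lhs.all (fun a => ri.getD a "" == rj.getD a "") then rhs.foldl (pvRhsStepA i j) st else st

-- one `for lhs, rhs in FD` body: the two nested row loops
def pvFdStepA (st : List (PySem.Dict String String) × Bool) (fd : List String × List String) :
    List (PySem.Dict String String) × Bool :=
  (List.range st.1.length).foldl
    (fun st1 i => (List.range st1.1.length).foldl (fun st2 j => pvPairStepA fd.1 fd.2 st2 i j) st1) st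

def pvFullRowA (r : PySem.Dict String String) : Bool := r.values.all (fun v => v == "X")

-- the `while changed` loop (fuel is only a totality guard; each iteration that continues
-- has set `changed`, which needs a fresh "X", so decom.length*attrs.length+2 passes suffice)
def pvLoopA (FD : List (List String × List String)) :
    Nat → List (PySem.Dict String String) → Bool × List (PySem.Dict String String)
  | 0, tbl => (false, tbl)
  | fuel + 1, tbl =>
    let st := FD.foldl pvFdStepA (tbl, false)
    if st.1.any pvFullRowA then (true, st.1)
    else if st.2 then pvLoopA FD fuel st.1
    else (false, st.1)

def lossless_chase (attrs : List String) (FD : List (List String × List String)) (decom : List (List String)) : Bool × (List (List (String × String))) :=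
  let sa := PySem.List.sorted attrs (fun x => x) false
  let r := pvLoopA FD (decom.length * attrs.length + 2) (pvTableA sa decom)
  (r.1, r.2.map PySem.Dict.items)

-- ===== PORT B =====
-- keys = list(dict.fromkeys(sorted(attrs)))
def pvKeysB (attrs : List String) : List String :=
  PySem.List.dedup (PySem.List.sorted attrs (fun x => x) false)

-- {a for a in keys if a in d}
def pvXrowB (keys : List String) (d : List String) : PySem.Set String :=
  PySem.Set.ofList (keys.filter (fun a => decide (a ∈ d)))

-- one `for lhs, rhs in FD` body of B: group the matching rows, push the gained attrs
def pvFdStepB (st : List (PySem.Set String) × Bool) (fd : List String × List String) :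
    List (PySem.Set String) × Bool :=
  let group := ((PySem.List.enumerate st.1 0).filter
      (fun p => fd.1.all (fun a => PySem.Set.contains p.2 a))).map (fun p => p.1)
  if 2 ≤ group.length then
    let gained := PySem.Set.ofList (fd.2.filter
      (fun a => group.any (fun i => PySem.Set.contains (PySem.List.pyGetD st.1 i []) a)))
    group.foldl (fun st2 i =>
      let x := PySem.List.pyGetD st2.1 i []
      if PySem.Set.issubset gained x then st2
      else (PySem.List.pySetD st2.1 i (PySem.Set.union x gained), true)) st
  else st

def pvLoopB (keys : List String) (FD : List (List String × List String)) :
    Nat → List (PySem.Set String) → Bool × List (PySem.Set String)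
  | 0, xs => (false, xs)
  | fuel + 1, xs =>
    let st := FD.foldl pvFdStepB (xs, false)
    if st.1.any (fun x => keys.all (fun a => PySem.Set.contains x a)) then (true, st.1)
    else if st.2 then pvLoopB keys FD fuel st.1
    else (false, st.1)

-- _chase_table(keys, xsets)
def pvTableB (keys : List String) (xs : List (PySem.Set String)) : List (List (String × String)) :=
  (PySem.List.enumerate xs 1).map
    (fun p => keys.map (fun a => (a, if PySem.Set.contains p.2 a then "X" else a ++ PySem.Int.toStr p.1)))

def lossless_chase_alt (attrs : List String) (FD : List (List String × List String)) (decom : List (List String)) : Bool × (List (List (String × String))) :=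
  let keys := pvKeysB attrs
  let r := pvLoopB keys FD (decom.length * attrs.length + 2) (decom.map (pvXrowB keys))
  (r.1, pvTableB keys r.2)

-- ===== PRECONDITION & SPEC =====
-- Pre_ excludes the inputs on which some functional dependency mentions an attribute outside
-- attrs while the table has at least two rows: there A raises KeyError whenever such an FD is
-- consulted on a row pair (which depends on the run), so these inputs are excluded
-- conservatively, including some on which A still returns (see claim cites).
-- Quiet inputs: no two rows agree on the in-attrs prefix of any lhs, so no FD ever fires
-- (the table stays at its initial value) and A never reads a missing key.
def pvQuiet (attrs : List String) (FD : List (List String × List String)) (decom : List (List String)) : Prop :=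
  ∀ fd ∈ FD, ∀ i < decom.length, ∀ j < decom.length, i < j →
    ¬ (∀ a ∈ fd.1.takeWhile (fun a => decide (a ∈ attrs)), a ∈ decom.getD i [] ∧ a ∈ decom.getD j [])
def Pre_lossless_chase (attrs : List String) (FD : List (List String × List String)) (decom : List (List String)) : Prop :=
  decom.length ≤ 1 ∨ (∀ fd ∈ FD, (∀ a ∈ fd.1, a ∈ attrs) ∧ (∀ a ∈ fd.2, a ∈ attrs)) ∨ pvQuiet attrs FD decom
instance (attrs : List String) (FD : List (List String × List String)) (decom : List (List String)) : Decidable (Pre_lossless_chase attrs FD decom) := by unfold Pre_lossless_chase pvQuiet; infer_instance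

def pvWitness_lossless_chase : List String × (List (List String × List String)) × List (List String) :=
  (["A", "B", "C"], [(["B"], ["C"])], [["A", "B"], ["B", "C"]])

def Spec_lossless_chase (attrs : List String) (FD : List (List String × List String)) (decom : List (List String)) (out : Bool × (List (List (String × String)))) : Prop := out = lossless_chase_alt attrs FD decom
instance (attrs : List String) (FD : List (List String × List String)) (decom : List (List String)) (out : Bool × (List (List (String × String)))) : Decidable (Spec_lossless_chase attrs FD decom out) := by unfold Spec_lossless_chase; infer_instance

-- ===== CLAIM (what is proved, stated in full; the proofs are below) =====
def Claim_equal_lossless_chase : Prop := ∀ (attrs : List String) (FD : List (List String × List String)) (decom : List (List String)), Dom_lossless_chase attrs FD decom → Pre_lossless_chase attrs FD decom → Spec_lossless_chase attrs FD decom (lossless_chase attrs FD decom)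

-- ===== LEMMAS AND PROOFS =====


-- ===== LEMMAS AND PROOFS =====
def pvDigits (n : Nat) : List Char :=
  if n < 10 then [Nat.digitChar n] else pvDigits (n / 10) ++ [Nat.digitChar (n % 10)]
decreasing_by exact Nat.div_lt_self (by omega) (by omega)

theorem pvDigits_eq (n : Nat) : pvDigits n =
    if n < 10 then [Nat.digitChar n] else pvDigits (n / 10) ++ [Nat.digitChar (n % 10)] := by
  rw [pvDigits]

theorem pvDigits_ne_nil (n : Nat) : pvDigits n ≠ [] := by
  rw [pvDigits]; split <;> simp

theorem pvDigits_isDigit (n : Nat) : ∀ c ∈ pvDigits n, c.isDigit = true := by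
  induction n using Nat.strong_induction_on with
  | _ n ih =>
    rw [pvDigits]
    split
    · rename_i h
      intro c hc; simp at hc; subst hc
      interval_cases n <;> decide
    · rename_i h
      intro c hc
      simp only [List.mem_append, List.mem_singleton] at hc
      rcases hc with hc | hc
      · exact ih (n / 10) (Nat.div_lt_self (by omega) (by omega)) c hc
      · subst hc
        have h10 : n % 10 < 10 := Nat.mod_lt _ (by omega)
        interval_cases h : (n % 10) <;> decide

theorem pvDigitChar_inj {m n : Nat} (hm : m < 10) (hn : n < 10)
    (h : Nat.digitChar m = Nat.digitChar n) : m = n := by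
  interval_cases m <;> interval_cases n <;> simp_all [Nat.digitChar]

theorem pvDigits_inj : ∀ m n : Nat, pvDigits m = pvDigits n → m = n := by
  intro m
  induction m using Nat.strong_induction_on with
  | _ m ih =>
    intro n h
    rw [pvDigits_eq m, pvDigits_eq n] at h
    by_cases hm : m < 10 <;> by_cases hn : n < 10
    · rw [if_pos hm, if_pos hn] at h
      simp at h
      exact pvDigitChar_inj hm hn h
    · exfalso
      rw [if_pos hm, if_neg hn] at h
      rcases List.exists_cons_of_ne_nil (pvDigits_ne_nil (n / 10)) with ⟨c, cs, hcs⟩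
      rw [hcs] at h
      have hl : ([Nat.digitChar m]).length = (c :: cs ++ [Nat.digitChar (n % 10)]).length := by rw [h]
      simp at hl
    · exfalso
      rw [if_neg hm, if_pos hn] at h
      rcases List.exists_cons_of_ne_nil (pvDigits_ne_nil (m / 10)) with ⟨c, cs, hcs⟩
      rw [hcs] at h
      have hl : (c :: cs ++ [Nat.digitChar (m % 10)]).length = ([Nat.digitChar n]).length := by rw [h]
      simp at hl
    · rw [if_neg hm, if_neg hn] at h
      have hlen : (pvDigits (m / 10)).length = (pvDigits (n / 10)).length := by
        have h1 : (pvDigits (m / 10) ++ [Nat.digitChar (m % 10)]).length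
            = (pvDigits (n / 10) ++ [Nat.digitChar (n % 10)]).length := by rw [h]
        simp at h1; omega
      have h2 := List.append_inj h (by simpa using hlen)
      have hdiv := ih (m / 10) (Nat.div_lt_self (by omega) (by omega)) (n / 10) h2.1
      have hmod : m % 10 = n % 10 := by
        have h3 := h2.2; simp at h3
        exact pvDigitChar_inj (Nat.mod_lt _ (by omega)) (Nat.mod_lt _ (by omega)) h3
      omega

theorem pvToDigitsCore_acc (f : Nat) : ∀ (n : Nat) (ds : List Char),
    Nat.toDigitsCore 10 f n ds = Nat.toDigitsCore 10 f n [] ++ ds := by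
  induction f with
  | zero => intro n ds; simp [Nat.toDigitsCore]
  | succ f ih =>
    intro n ds
    simp only [Nat.toDigitsCore]
    split
    · simp
    · rw [ih (n / 10) ((n % 10).digitChar :: ds), ih (n / 10) [(n % 10).digitChar]]
      simp

theorem pvToDigitsCore_eq (f : Nat) : ∀ n : Nat, n < f → Nat.toDigitsCore 10 f n [] = pvDigits n := by
  induction f with
  | zero => omega
  | succ f ih =>
    intro n hn
    simp only [Nat.toDigitsCore]
    split
    · rename_i h0
      rw [pvDigits]
      have hlt : n < 10 := by omega
      rw [if_pos hlt, Nat.mod_eq_of_lt hlt]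
    · rename_i h0
      rw [pvToDigitsCore_acc, ih (n / 10) (by omega), pvDigits_eq n]
      have hge : ¬ n < 10 := by
        intro hlt
        exact h0 (by omega)
      rw [if_neg hge]

theorem pvToDigits_eq (n : Nat) : Nat.toDigits 10 n = pvDigits n := by
  rw [Nat.toDigits]
  exact pvToDigitsCore_eq (n + 1) n (by omega)

theorem pvToChars_pos (i : Int) (h : 1 ≤ i) : PySem.Int.toChars i = pvDigits i.toNat := by
  rw [PySem.Int.toChars, if_neg (by omega), pvToDigits_eq]

theorem pvTag_toList (a : String) (i : Int) (h : 1 ≤ i) :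
    (a ++ PySem.Int.toStr i).toList = a.toList ++ pvDigits i.toNat := by
  rw [PySem.Int.toStr]
  rw [String.toList_append, String.toList_ofList, ← PySem.Int.toList_toStr]
  rw [PySem.Int.toList_toStr, pvToChars_pos i h]

theorem pvTag_ne_X (a : String) (i : Int) (h : 1 ≤ i) : ¬ a ++ PySem.Int.toStr i = "X" := by
  intro he
  have := congrArg String.toList he
  rw [pvTag_toList a i h] at this
  have hx : ('X' : Char) ∈ a.toList ++ pvDigits i.toNat := by
    rw [this]; decide
  have hlen : (a.toList ++ pvDigits i.toNat).length = 1 := by rw [this]; decide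
  rcases List.exists_cons_of_ne_nil (pvDigits_ne_nil i.toNat) with ⟨c, cs, hcs⟩
  rw [hcs] at hx hlen
  simp at hlen
  have ha : a.toList = [] := by
    have h0 : a.toList.length = 0 := by rw [String.length_toList]; omega
    exact List.length_eq_zero_iff.mp h0
  have hcs2 : cs = [] := List.length_eq_zero_iff.mp (by omega)
  rw [ha, hcs2] at hx
  simp at hx
  have hdig := pvDigits_isDigit i.toNat 'X' (by rw [hcs, hcs2, hx]; simp)
  simp at hdig

theorem pvTag_inj (a : String) (i j : Int) (hi : 1 ≤ i) (hj : 1 ≤ j) (hij : i ≠ j) :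
    ¬ a ++ PySem.Int.toStr i = a ++ PySem.Int.toStr j := by
  intro he
  have h2 := congrArg String.toList he
  rw [pvTag_toList a i hi, pvTag_toList a j hj] at h2
  have h3 := List.append_cancel_left h2
  have := pvDigits_inj _ _ h3
  omega

-- ===== stage 2: dict-comprehension and table abstraction =====

def pvRowG (keys : List String) (i : Int) (x : PySem.Set String) : PySem.Dict String String :=
  PySem.Dict.mk (keys.map (fun a => (a, if a ∈ x then "X" else a ++ PySem.Int.toStr i)))

def pvTblG (keys : List String) : Int → List (PySem.Set String) → List (PySem.Dict String String)
  | _, [] => []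
  | i, x :: xs => pvRowG keys i x :: pvTblG keys (i + 1) xs

theorem pvGet?_mk_map (ks : List String) (f : String → String) (a : String) :
    (PySem.Dict.mk (ks.map (fun b => (b, f b)))).get? a
      = if a ∈ ks then some (f a) else none := by
  induction ks with
  | nil => simp [PySem.Dict.get?]
  | cons k ks ih =>
    simp only [List.map_cons]
    rw [PySem.Dict.get?_mk_cons]
    by_cases hk : k = a
    · subst hk; simp
    · have : (k == a) = false := by simp [hk]
      rw [this]
      simp only [List.mem_cons]
      rw [ih]
      by_cases ha : a ∈ ks <;> simp [ha, Ne.symm hk, hk]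

theorem pvContains_mk_map (ks : List String) (f : String → String) (a : String) :
    (PySem.Dict.mk (ks.map (fun b => (b, f b)))).contains a = decide (a ∈ ks) := by
  by_cases ha : a ∈ ks
  · rw [decide_eq_true ha]
    rw [PySem.Dict.contains_iff_mem_keys, PySem.Dict.keys_mk]
    simpa using ha
  · rw [decide_eq_false ha, ← Bool.not_eq_true, PySem.Dict.contains_iff_mem_keys, PySem.Dict.keys_mk]
    simpa using ha

theorem pvGetD_mk_map (ks : List String) (f : String → String) (a : String) :
    (PySem.Dict.mk (ks.map (fun b => (b, f b)))).getD a ""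
      = if a ∈ ks then f a else "" := by
  rw [PySem.Dict.getD_eq_get?_getD, pvGet?_mk_map]
  by_cases ha : a ∈ ks <;> simp [ha]

theorem pvInsert_mk_map (ks : List String) (f : String → String) (a : String) (v : String)
    (ha : a ∈ ks) :
    (PySem.Dict.mk (ks.map (fun b => (b, f b)))).insert a v
      = PySem.Dict.mk (ks.map (fun b => (b, if b = a then v else f b))) := by
  apply PySem.Dict.ext
  rw [PySem.Dict.items_insert_of_contains _ _ (by rw [pvContains_mk_map]; simpa using ha)]
  show (List.map _ (ks.map _)) = _
  rw [List.map_map]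
  apply List.map_congr_left
  intro b hb
  by_cases hba : b = a
  · subst hba; simp
  · simp [hba]

theorem pvDedup_append_singleton (l : List String) (a : String) :
    PySem.List.dedup (l ++ [a])
      = if a ∈ l then PySem.List.dedup l else PySem.List.dedup l ++ [a] := by
  have h1 : ∀ m : List String, PySem.List.dedup m = PySem.Set.ofList m := by
    intro m; simp
  rw [h1, h1, PySem.Set.ofList_eq_foldl, List.foldl_append, ← PySem.Set.ofList_eq_foldl]
  show PySem.Set.add _ a = _
  rw [PySem.Set.add]
  by_cases ha : a ∈ l
  · have hc : (PySem.Set.ofList l).contains a = true := by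
      rw [PySem.Set.contains_iff, PySem.Set.mem_ofList]; exact ha
    rw [hc, if_pos ha]
    simp
  · have hc : (PySem.Set.ofList l).contains a = false := by
      rw [← Bool.not_eq_true, PySem.Set.contains_iff, PySem.Set.mem_ofList]; exact ha
    rw [hc, if_neg ha]
    simp

theorem pvDictComp (l : List String) (f : String → String) :
    l.foldl (fun d a => d.insert a (f a)) PySem.Dict.empty
      = PySem.Dict.mk ((PySem.List.dedup l).map (fun a => (a, f a))) := by
  induction l using List.reverseRecOn with
  | nil => rfl
  | append_singleton l a ih =>
    rw [List.foldl_append, List.foldl_cons, List.foldl_nil, ih, pvDedup_append_singleton]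
    by_cases ha : a ∈ l
    · rw [if_pos ha, pvInsert_mk_map _ f a (f a) (by rw [PySem.List.mem_dedup]; exact ha)]
      congr 1
      apply List.map_congr_left
      intro b hb
      by_cases hba : b = a
      · subst hba; simp
      · simp [hba]
    · rw [if_neg ha]
      apply PySem.Dict.ext
      rw [PySem.Dict.items_insert_of_not_contains _ _
        (by rw [pvContains_mk_map]; simp [PySem.List.mem_dedup, ha])]
      simp

theorem pvRowA_eq (sa : List String) (i : Int) (d : List String) :
    pvRowA sa i d = pvRowG (PySem.List.dedup sa) i (pvXrowB (PySem.List.dedup sa) d) := by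
  rw [pvRowA, pvDictComp, pvRowG]
  congr 1
  apply List.map_congr_left
  intro a ha
  have hk : a ∈ PySem.List.dedup sa := ha
  have : a ∈ pvXrowB (PySem.List.dedup sa) d ↔ a ∈ d := by
    rw [pvXrowB, PySem.Set.mem_ofList, List.mem_filter]
    constructor
    · rintro ⟨-, h2⟩; exact of_decide_eq_true h2
    · intro had; exact ⟨hk, decide_eq_true had⟩
  by_cases had : a ∈ d
  · rw [if_pos had, if_pos (this.mpr had)]
  · rw [if_neg had, if_neg (fun h => had (this.mp h))]

theorem pvTableA_fold (sa : List String) :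
    ∀ (decom : List (List String)) (s : Int) (acc : List (PySem.Dict String String)),
    (PySem.List.enumerate decom s).foldl (fun res p => res ++ [pvRowA sa p.1 p.2]) acc
      = acc ++ pvTblG (PySem.List.dedup sa) s (decom.map (pvXrowB (PySem.List.dedup sa))) := by
  intro decom
  induction decom with
  | nil => intro s acc; simp [PySem.List.enumerate, pvTblG]
  | cons d ds ih =>
    intro s acc
    rw [PySem.List.enumerate_cons, List.foldl_cons, ih]
    simp [pvTblG, pvRowA_eq]

theorem pvTableA_eq (sa : List String) (decom : List (List String)) :
    pvTableA sa decom
      = pvTblG (PySem.List.dedup sa) 1 (decom.map (pvXrowB (PySem.List.dedup sa))) := by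
  rw [pvTableA, pvTableA_fold]
  simp

theorem pvTblG_length (keys : List String) :
    ∀ (xs : List (PySem.Set String)) (s : Int), (pvTblG keys s xs).length = xs.length := by
  intro xs
  induction xs with
  | nil => intro s; rfl
  | cons x xs ih => intro s; simp [pvTblG, ih]

theorem pvTblG_getD (keys : List String) :
    ∀ (xs : List (PySem.Set String)) (s : Int) (r : Nat), r < xs.length →
    (pvTblG keys s xs).getD r PySem.Dict.empty = pvRowG keys (s + r) (xs.getD r []) := by
  intro xs
  induction xs with
  | nil => intro s r h; simp at h
  | cons x xs ih =>
    intro s r h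
    cases r with
    | zero => simp [pvTblG]
    | succ r =>
      simp only [pvTblG, List.getD_cons_succ]
      rw [ih (s + 1) r (by simpa using h)]
      congr 1
      push_cast
      ring

theorem pvTblG_set (keys : List String) :
    ∀ (xs : List (PySem.Set String)) (s : Int) (r : Nat) (y : PySem.Set String),
    pvTblG keys s (xs.set r y) = (pvTblG keys s xs).set r (pvRowG keys (s + r) y) := by
  intro xs
  induction xs with
  | nil => intro s r y; simp [pvTblG]
  | cons x xs ih =>
    intro s r y
    cases r with
    | zero => simp [pvTblG]
    | succ r =>
      show pvRowG keys s x :: pvTblG keys (s+1) (xs.set r y) = _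
      rw [ih (s + 1) r y]
      show _ = pvRowG keys s x :: (pvTblG keys (s+1) xs).set r (pvRowG keys (s + (↑r+1)) y)
      congr 3
      push_cast
      ring

theorem pvTblG_congr (keys : List String) :
    ∀ (xs ys : List (PySem.Set String)) (s : Int), xs.length = ys.length →
    (∀ (r : Nat) (a : String), a ∈ xs.getD r [] ↔ a ∈ ys.getD r []) →
    pvTblG keys s xs = pvTblG keys s ys := by
  intro xs
  induction xs with
  | nil =>
    intro ys s hlen _
    cases ys with
    | nil => rfl
    | cons y ys => simp at hlen
  | cons x xs ih =>
    intro ys s hlen hm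
    cases ys with
    | nil => simp at hlen
    | cons y ys =>
      simp only [pvTblG]
      have hrow : pvRowG keys s x = pvRowG keys s y := by
        rw [pvRowG, pvRowG]
        congr 1
        apply List.map_congr_left
        intro a _
        have hiff : (a ∈ x) ↔ (a ∈ y) := by simpa using hm 0 a
        exact congrArg (fun v => (a, v)) (if_congr hiff rfl rfl)
      rw [hrow, ih ys (s + 1) (by simpa using hlen) (fun r a => by simpa using hm (r + 1) a)]

theorem pvFullRowA_rowG (keys : List String) (i : Int) (hi : 1 ≤ i) (x : PySem.Set String) :
    pvFullRowA (pvRowG keys i x) = keys.all (fun a => decide (a ∈ x)) := by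
  rw [pvFullRowA, pvRowG]
  show (PySem.Dict.values _).all _ = _
  rw [PySem.Dict.values_mk, List.map_map, List.all_map]
  apply List.all_congr rfl
  intro a
  by_cases ha : a ∈ x
  · simp [ha]
  · simp only [Function.comp, ha, decide_eq_false ha, if_false, iff_false, decide_false]
    simp only [beq_eq_false_iff_ne, ne_eq]
    exact pvTag_ne_X a i hi

-- ===== stage 3: the pure model of the pair sweep =====

def pvMemAt (xs : List (PySem.Set String)) (r : Nat) (a : String) : Prop := a ∈ xs.getD r []

def pvRhsStepM (i j : Nat) (st : List (PySem.Set String) × Bool) (a : String) :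
    List (PySem.Set String) × Bool :=
  let xi := st.1.getD i []
  let xj := st.1.getD j []
  if a ∈ xi ∧ ¬ a ∈ xj then (st.1.set j (PySem.Set.add xj a), true)
  else if a ∈ xj ∧ ¬ a ∈ xi then (st.1.set i (PySem.Set.add xi a), true)
  else st

def pvPairStepM (lhs rhs : List String) (st : List (PySem.Set String) × Bool) (i j : Nat) :
    List (PySem.Set String) × Bool :=
  if j ≤ i then st
  else if lhs.all (fun a => decide (a ∈ st.1.getD i [])) && lhs.all (fun a => decide (a ∈ st.1.getD j [])) then
    rhs.foldl (pvRhsStepM i j) st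
  else st

def pvFdStepM (lhs rhs : List String) (st : List (PySem.Set String) × Bool) :
    List (PySem.Set String) × Bool :=
  (List.range st.1.length).foldl
    (fun st1 i => (List.range st1.1.length).foldl (fun st2 j => pvPairStepM lhs rhs st2 i j) st1) st

theorem pvMemAt_set_self (xs : List (PySem.Set String)) (r : Nat) (y : PySem.Set String)
    (h : r < xs.length) (a : String) : pvMemAt (xs.set r y) r a ↔ a ∈ y := by
  rw [pvMemAt]
  simp [List.getD, h]

theorem pvMemAt_set_ne (xs : List (PySem.Set String)) (r r' : Nat) (y : PySem.Set String)
    (h : r' ≠ r) (a : String) : pvMemAt (xs.set r y) r' a ↔ pvMemAt xs r' a := by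
  rw [pvMemAt, pvMemAt]
  simp [List.getD, List.getElem?_set_ne (Ne.symm h)]

theorem pvRhsStepM_length (i j : Nat) (st : List (PySem.Set String) × Bool) (a : String) :
    (pvRhsStepM i j st a).1.length = st.1.length := by
  rw [pvRhsStepM]
  split
  · simp
  · split <;> simp

theorem pvPairStepM_length (lhs rhs : List String) (st : List (PySem.Set String) × Bool) (i j : Nat) :
    (pvPairStepM lhs rhs st i j).1.length = st.1.length := by
  rw [pvPairStepM]
  split
  · rfl
  split
  · have : ∀ (rs : List String) (s : List (PySem.Set String) × Bool),
        (rs.foldl (pvRhsStepM i j) s).1.length = s.1.length := by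
      intro rs
      induction rs with
      | nil => intro s; rfl
      | cons b bs ih => intro s; rw [List.foldl_cons, ih, pvRhsStepM_length]
    exact this rhs st
  · rfl

-- generic fold helpers
theorem pvFoldlPreserve {α β : Type} (P : α → Prop) (f : α → β → α) (l : List β)
    (h : ∀ s b, b ∈ l → P s → P (f s b)) : ∀ s, P s → P (l.foldl f s) := by
  induction l with
  | nil => intro s hs; exact hs
  | cons b bs ih =>
    intro s hs
    rw [List.foldl_cons]
    exact ih (fun s' b' hb' => h s' b' (List.mem_cons_of_mem _ hb')) _ (h s b (List.mem_cons_self) hs)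

theorem pvFoldlRel {α β γ : Type} (R : α → β → Prop) (f : α → γ → α) (g : β → γ → β) (l : List γ)
    (h : ∀ a b x, x ∈ l → R a b → R (f a x) (g b x)) :
    ∀ a b, R a b → R (l.foldl f a) (l.foldl g b) := by
  induction l with
  | nil => intro a b hab; exact hab
  | cons x xs ih =>
    intro a b hab
    rw [List.foldl_cons, List.foldl_cons]
    exact ih (fun a' b' x' hx' => h a' b' x' (List.mem_cons_of_mem _ hx')) _ _ (h a b x (List.mem_cons_self) hab)

theorem pvAllAnd (l : List String) (f g : String → Bool) :
    l.all (fun a => f a && g a) = (l.all f && l.all g) := by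
  induction l with
  | nil => rfl
  | cons b bs ih =>
    simp only [List.all_cons, ih]
    cases f b <;> cases g b <;> cases bs.all f <;> cases bs.all g <;> rfl

-- ===== conjugacy between port A's steps (on γ-states) and the model =====

theorem pvRowG_insert (keys : List String) (i : Int) (x : PySem.Set String) (a : String)
    (ha : a ∈ keys) (hax : a ∉ x) :
    (pvRowG keys i x).insert a "X" = pvRowG keys i (PySem.Set.add x a) := by
  rw [pvRowG, pvRowG, pvInsert_mk_map _ _ a "X" ha]
  congr 1
  apply List.map_congr_left
  intro b _
  by_cases hba : b = a
  · subst hba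
    rw [if_pos rfl, if_pos (by rw [PySem.Set.mem_add]; right; rfl)]
  · rw [if_neg hba]
    have : (b ∈ PySem.Set.add x a) ↔ (b ∈ x) := by
      rw [PySem.Set.mem_add]
      constructor
      · rintro (h | h)
        · exact h
        · exact absurd h hba
      · exact Or.inl
    exact congrArg (fun v => (b, v)) (if_congr this.symm rfl rfl)

theorem pvRowG_getD (keys : List String) (i : Int) (x : PySem.Set String) (a : String) :
    (pvRowG keys i x).getD a ""
      = if a ∈ keys then (if a ∈ x then "X" else a ++ PySem.Int.toStr i) else "" := by
  rw [pvRowG, pvGetD_mk_map]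

theorem pvRhsStepA_conj (keys : List String) (i j : Nat) (xs : List (PySem.Set String)) (c : Bool)
    (a : String) (ha : a ∈ keys) (hi : i < xs.length) (hj : j < xs.length) (hij : i ≠ j) :
    pvRhsStepA i j (pvTblG keys 1 xs, c) a
      = ((pvTblG keys 1 (pvRhsStepM i j (xs, c) a).1, (pvRhsStepM i j (xs, c) a).2)) := by
  have hgi := pvTblG_getD keys xs 1 i hi
  have hgj := pvTblG_getD keys xs 1 j hj
  have hti : ¬ a ++ PySem.Int.toStr (1 + (i : Int)) = "X" := pvTag_ne_X a _ (by omega)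
  have htj : ¬ a ++ PySem.Int.toStr (1 + (j : Int)) = "X" := pvTag_ne_X a _ (by omega)
  simp only [pvRhsStepA, pvRhsStepM, hgi, hgj, pvRowG_getD, if_pos ha]
  by_cases hxi : a ∈ xs.getD i []
  · by_cases hxj : a ∈ xs.getD j []
    · rw [if_pos hxi, if_pos hxj]
      rw [if_neg (c := ("X" : String) = "X" ∧ ¬ ("X" : String) = "X") (fun h => h.2 rfl),
          if_neg (c := ("X" : String) = "X" ∧ ¬ ("X" : String) = "X") (fun h => h.2 rfl),
          if_neg (c := a ∈ xs.getD i [] ∧ a ∉ xs.getD j []) (fun h => h.2 hxj),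
          if_neg (c := a ∈ xs.getD j [] ∧ a ∉ xs.getD i []) (fun h => h.2 hxi)]
    · rw [if_pos hxi, if_neg hxj]
      rw [if_pos (c := ("X" : String) = "X" ∧ ¬ (a ++ PySem.Int.toStr (1 + (j:Int))) = "X") ⟨rfl, htj⟩,
          if_pos (c := a ∈ xs.getD i [] ∧ a ∉ xs.getD j []) ⟨hxi, hxj⟩]
      rw [pvRowG_insert keys _ _ a ha hxj, pvTblG_set]
  · by_cases hxj : a ∈ xs.getD j []
    · rw [if_neg hxi, if_pos hxj]
      rw [if_neg (c := (a ++ PySem.Int.toStr (1 + (i:Int))) = "X" ∧ ¬ ("X" : String) = "X") (fun h => hti h.1),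
          if_pos (c := ("X" : String) = "X" ∧ ¬ (a ++ PySem.Int.toStr (1 + (i:Int))) = "X") ⟨rfl, hti⟩,
          if_neg (c := a ∈ xs.getD i [] ∧ a ∉ xs.getD j []) (fun h => hxi h.1),
          if_pos (c := a ∈ xs.getD j [] ∧ a ∉ xs.getD i []) ⟨hxj, hxi⟩]
      rw [pvRowG_insert keys _ _ a ha hxi, pvTblG_set]
    · rw [if_neg hxi, if_neg hxj]
      rw [if_neg (c := (a ++ PySem.Int.toStr (1 + (i:Int))) = "X" ∧ ¬ (a ++ PySem.Int.toStr (1 + (j:Int))) = "X") (fun h => hti h.1),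
          if_neg (c := (a ++ PySem.Int.toStr (1 + (j:Int))) = "X" ∧ ¬ (a ++ PySem.Int.toStr (1 + (i:Int))) = "X") (fun h => htj h.1),
          if_neg (c := a ∈ xs.getD i [] ∧ a ∉ xs.getD j []) (fun h => hxi h.1),
          if_neg (c := a ∈ xs.getD j [] ∧ a ∉ xs.getD i []) (fun h => hxj h.1)]

theorem pvAllCongrMem (l : List String) (f g : String → Bool)
    (h : ∀ a ∈ l, f a = g a) : l.all f = l.all g := by
  induction l with
  | nil => rfl
  | cons b bs ih =>
    simp only [List.all_cons]
    rw [h b (List.mem_cons_self), ih (fun a ha => h a (List.mem_cons_of_mem _ ha))]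

theorem pvMatch_conj (keys lhs : List String) (hlhs : ∀ a ∈ lhs, a ∈ keys)
    (xs : List (PySem.Set String)) (i j : Nat) (hi : i < xs.length) (hj : j < xs.length)
    (hij : i ≠ j) :
    lhs.all (fun a => ((pvTblG keys 1 xs).getD i PySem.Dict.empty).getD a ""
        == ((pvTblG keys 1 xs).getD j PySem.Dict.empty).getD a "")
      = (lhs.all (fun a => decide (a ∈ xs.getD i [])) && lhs.all (fun a => decide (a ∈ xs.getD j []))) := by
  rw [← pvAllAnd]
  apply pvAllCongrMem
  intro a ha
  have hak := hlhs a ha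
  rw [pvTblG_getD keys xs 1 i hi, pvTblG_getD keys xs 1 j hj, pvRowG_getD, pvRowG_getD,
    if_pos hak, if_pos hak]
  have hti : ¬ a ++ PySem.Int.toStr (1 + (i : Int)) = "X" := pvTag_ne_X a _ (by omega)
  have htj : ¬ a ++ PySem.Int.toStr (1 + (j : Int)) = "X" := pvTag_ne_X a _ (by omega)
  by_cases hxi : a ∈ xs.getD i [] <;> by_cases hxj : a ∈ xs.getD j []
  · rw [if_pos hxi, if_pos hxj, decide_eq_true hxi, decide_eq_true hxj]; rfl
  · rw [if_pos hxi, if_neg hxj, decide_eq_true hxi, decide_eq_false hxj]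
    simp only [Bool.true_and]
    rw [beq_eq_false_iff_ne]
    exact fun h => htj h.symm
  · rw [if_neg hxi, if_pos hxj, decide_eq_false hxi]
    simp only [Bool.false_and]
    rw [beq_eq_false_iff_ne]
    exact hti
  · rw [if_neg hxi, if_neg hxj, decide_eq_false hxi]
    simp only [Bool.false_and]
    rw [beq_eq_false_iff_ne]
    exact pvTag_inj a _ _ (by omega) (by omega) (by omega)

theorem pvRhsFold_conj (keys : List String) (i j : Nat) (hij : i ≠ j) (rhs : List String)
    (hrhs : ∀ a ∈ rhs, a ∈ keys) :
    ∀ (xs : List (PySem.Set String)) (c : Bool), i < xs.length → j < xs.length →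
    rhs.foldl (pvRhsStepA i j) (pvTblG keys 1 xs, c)
      = ((pvTblG keys 1 (rhs.foldl (pvRhsStepM i j) (xs, c)).1, (rhs.foldl (pvRhsStepM i j) (xs, c)).2)) := by
  induction rhs with
  | nil => intro xs c _ _; rfl
  | cons b bs ih =>
    intro xs c hi hj
    rw [List.foldl_cons, List.foldl_cons]
    rw [pvRhsStepA_conj keys i j xs c b (hrhs b (List.mem_cons_self)) hi hj hij]
    have hlen : (pvRhsStepM i j (xs, c) b).1.length = xs.length := pvRhsStepM_length i j (xs, c) b
    have := ih (fun a ha => hrhs a (List.mem_cons_of_mem _ ha))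
      (pvRhsStepM i j (xs, c) b).1 (pvRhsStepM i j (xs, c) b).2
      (by omega) (by omega)
    simpa using this

theorem pvPairStepA_conj (keys lhs rhs : List String)
    (hlhs : ∀ a ∈ lhs, a ∈ keys) (hrhs : ∀ a ∈ rhs, a ∈ keys)
    (xs : List (PySem.Set String)) (c : Bool) (i j : Nat) (hj : j < xs.length) :
    pvPairStepA lhs rhs (pvTblG keys 1 xs, c) i j
      = ((pvTblG keys 1 (pvPairStepM lhs rhs (xs, c) i j).1, (pvPairStepM lhs rhs (xs, c) i j).2)) := by
  rw [pvPairStepA, pvPairStepM]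
  by_cases hij : j ≤ i
  · rw [if_pos hij, if_pos hij]
  · rw [if_neg hij, if_neg hij]
    have hi : i < xs.length := by omega
    simp only
    rw [pvMatch_conj keys lhs hlhs xs i j hi hj (by omega)]
    by_cases hm : (lhs.all (fun a => decide (a ∈ xs.getD i [])) && lhs.all (fun a => decide (a ∈ xs.getD j []))) = true
    · rw [if_pos hm, if_pos hm]
      exact pvRhsFold_conj keys i j (by omega) rhs hrhs xs c hi hj
    · rw [if_neg hm, if_neg hm]

theorem pvFdStepA_conj (keys lhs rhs : List String)
    (hlhs : ∀ a ∈ lhs, a ∈ keys) (hrhs : ∀ a ∈ rhs, a ∈ keys)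
    (xs : List (PySem.Set String)) (c : Bool) :
    pvFdStepA (pvTblG keys 1 xs, c) (lhs, rhs)
      = ((pvTblG keys 1 (pvFdStepM lhs rhs (xs, c)).1, (pvFdStepM lhs rhs (xs, c)).2)) := by
  rw [pvFdStepA, pvFdStepM]
  simp only [pvTblG_length]
  refine (pvFoldlRel
    (fun (st : List (PySem.Dict String String) × Bool) (stM : List (PySem.Set String) × Bool) =>
      st = (pvTblG keys 1 stM.1, stM.2) ∧ stM.1.length = xs.length)
    _ _ (List.range xs.length) ?_ (pvTblG keys 1 xs, c) (xs, c) ⟨rfl, rfl⟩).1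
  intro st stM i hi ⟨hEq, hLen⟩
  subst hEq
  simp only [pvTblG_length, hLen]
  refine pvFoldlRel
    (fun (st : List (PySem.Dict String String) × Bool) (stM : List (PySem.Set String) × Bool) =>
      st = (pvTblG keys 1 stM.1, stM.2) ∧ stM.1.length = xs.length)
    _ _ (List.range xs.length) ?_ (pvTblG keys 1 stM.1, stM.2) stM ⟨rfl, hLen⟩
  intro st2 stM2 j hj ⟨hEq2, hLen2⟩
  subst hEq2
  constructor
  · exact pvPairStepA_conj keys lhs rhs hlhs hrhs stM2.1 stM2.2 i j
      (by rw [hLen2]; exact List.mem_range.mp hj)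
  · rw [pvPairStepM_length]; exact hLen2

-- ===== the sweep's invariant and characterization =====

def pvIsG (lhs : List String) (xs0 : List (PySem.Set String)) (r : Nat) : Prop :=
  r < xs0.length ∧ ∀ a ∈ lhs, pvMemAt xs0 r a

def pvGainedP (lhs rhs : List String) (xs0 : List (PySem.Set String)) (a : String) : Prop :=
  a ∈ rhs ∧ ∃ r, pvIsG lhs xs0 r ∧ pvMemAt xs0 r a

def pvTwo (lhs : List String) (xs0 : List (PySem.Set String)) : Prop :=
  ∃ r g, pvIsG lhs xs0 r ∧ pvIsG lhs xs0 g ∧ r ≠ g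

def pvInv (lhs rhs : List String) (xs0 : List (PySem.Set String)) (c0 : Bool)
    (st : List (PySem.Set String) × Bool) : Prop :=
  st.1.length = xs0.length ∧
  (∀ r a, pvMemAt xs0 r a → pvMemAt st.1 r a) ∧
  (∀ r a, pvMemAt st.1 r a → pvMemAt xs0 r a ∨ (pvTwo lhs xs0 ∧ pvIsG lhs xs0 r ∧ pvGainedP lhs rhs xs0 a)) ∧
  (st.2 = true ↔ (c0 = true ∨ ∃ r a, pvMemAt st.1 r a ∧ ¬ pvMemAt xs0 r a))

theorem pvMemAt_nil_len (xs : List (PySem.Set String)) (r : Nat) (a : String)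
    (h : xs.length ≤ r) : ¬ pvMemAt xs r a := by
  rw [pvMemAt, List.getD_eq_getElem?_getD, List.getElem?_eq_none (by omega)]
  simp

theorem pvMemAt_set_add_mono (xs : List (PySem.Set String)) (idx r : Nat) (a : String)
    (y : PySem.Set String) (hy : ∀ c ∈ xs.getD idx [], c ∈ y)
    (h : pvMemAt xs r a) : pvMemAt (xs.set idx y) r a := by
  by_cases hr : r = idx
  · subst hr
    by_cases hlen : r < xs.length
    · rw [pvMemAt_set_self _ _ _ hlen]
      exact hy a h
    · exact absurd h (pvMemAt_nil_len xs r a (by omega))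
  · rw [pvMemAt_set_ne _ _ _ _ hr]
    exact h

theorem pvRhsStepM_mono (i j : Nat) (st : List (PySem.Set String) × Bool) (b : String)
    (r : Nat) (a : String) (h : pvMemAt st.1 r a) : pvMemAt (pvRhsStepM i j st b).1 r a := by
  rw [pvRhsStepM]
  split
  · exact pvMemAt_set_add_mono _ _ _ _ _ (fun c hc => by rw [PySem.Set.mem_add]; exact Or.inl hc) h
  split
  · exact pvMemAt_set_add_mono _ _ _ _ _ (fun c hc => by rw [PySem.Set.mem_add]; exact Or.inl hc) h
  · exact h

theorem pvPairStepM_mono (lhs rhs : List String) (st : List (PySem.Set String) × Bool)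
    (i j : Nat) (r : Nat) (a : String) (h : pvMemAt st.1 r a) :
    pvMemAt (pvPairStepM lhs rhs st i j).1 r a := by
  rw [pvPairStepM]
  split
  · exact h
  split
  · exact pvFoldlPreserve (fun s => pvMemAt s.1 r a) (pvRhsStepM i j) rhs
      (fun s b _ hs => pvRhsStepM_mono i j s b r a hs) st h
  · exact h

theorem pvRhsStepM_inv (lhs rhs : List String) (xs0 : List (PySem.Set String)) (c0 : Bool)
    (i j : Nat) (hij : i ≠ j) (hGi : pvIsG lhs xs0 i) (hGj : pvIsG lhs xs0 j)
    (hTwo : pvTwo lhs xs0) (a : String) (ha : a ∈ rhs)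
    (st : List (PySem.Set String) × Bool) (hInv : pvInv lhs rhs xs0 c0 st) :
    pvInv lhs rhs xs0 c0 (pvRhsStepM i j st a) := by
  obtain ⟨hLen, hLow, hUp, hFlag⟩ := hInv
  have hjn : j < st.1.length := by rw [hLen]; exact hGj.1
  have hin : i < st.1.length := by rw [hLen]; exact hGi.1
  rw [pvRhsStepM]
  split
  · rename_i hcond
    obtain ⟨hxi, hxj⟩ := hcond
    have hgained : pvGainedP lhs rhs xs0 a := by
      rcases hUp i a hxi with h0 | h0
      · exact ⟨ha, i, hGi, h0⟩
      · exact h0.2.2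
    refine ⟨by simpa using hLen, ?_, ?_, ?_⟩
    · intro r b hb
      exact pvMemAt_set_add_mono _ _ _ _ _
        (fun c hc => by rw [PySem.Set.mem_add]; exact Or.inl hc) (hLow r b hb)
    · intro r b hb
      by_cases hr : r = j
      · subst hr
        rw [pvMemAt_set_self _ _ _ hjn] at hb
        rw [PySem.Set.mem_add] at hb
        rcases hb with hb | hb
        · exact hUp r b hb
        · subst hb
          exact Or.inr ⟨hTwo, hGj, hgained⟩
      · rw [pvMemAt_set_ne _ _ _ _ hr] at hb
        exact hUp r b hb
    · constructor
      · intro _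
        right
        refine ⟨j, a, ?_, ?_⟩
        · rw [pvMemAt_set_self _ _ _ hjn, PySem.Set.mem_add]
          exact Or.inr rfl
        · intro hmem
          exact hxj (hLow j a hmem)
      · intro _; rfl
  split
  · rename_i hcond2 hcond
    obtain ⟨hxj, hxi⟩ := hcond
    have hgained : pvGainedP lhs rhs xs0 a := by
      rcases hUp j a hxj with h0 | h0
      · exact ⟨ha, j, hGj, h0⟩
      · exact h0.2.2
    refine ⟨by simpa using hLen, ?_, ?_, ?_⟩
    · intro r b hb
      exact pvMemAt_set_add_mono _ _ _ _ _
        (fun c hc => by rw [PySem.Set.mem_add]; exact Or.inl hc) (hLow r b hb)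
    · intro r b hb
      by_cases hr : r = i
      · subst hr
        rw [pvMemAt_set_self _ _ _ hin] at hb
        rw [PySem.Set.mem_add] at hb
        rcases hb with hb | hb
        · exact hUp r b hb
        · subst hb
          exact Or.inr ⟨hTwo, hGi, hgained⟩
      · rw [pvMemAt_set_ne _ _ _ _ hr] at hb
        exact hUp r b hb
    · constructor
      · intro _
        right
        refine ⟨i, a, ?_, ?_⟩
        · rw [pvMemAt_set_self _ _ _ hin, PySem.Set.mem_add]
          exact Or.inr rfl
        · intro hmem
          exact hxi (hLow i a hmem)
      · intro _; rfl
  · exact ⟨hLen, hLow, hUp, hFlag⟩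

theorem pvPairStepM_inv (lhs rhs : List String) (xs0 : List (PySem.Set String)) (c0 : Bool)
    (st : List (PySem.Set String) × Bool) (hInv : pvInv lhs rhs xs0 c0 st)
    (i j : Nat) (hj : j < st.1.length) :
    pvInv lhs rhs xs0 c0 (pvPairStepM lhs rhs st i j) := by
  rw [pvPairStepM]
  split
  · exact hInv
  split
  · rename_i hle hm
    obtain ⟨hLen, hLow, hUp, hFlag⟩ := hInv
    rw [Bool.and_eq_true, List.all_eq_true, List.all_eq_true] at hm
    have hmi : ∀ b ∈ lhs, b ∈ st.1.getD i [] := fun b hb => of_decide_eq_true (hm.1 b hb)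
    have hmj : ∀ b ∈ lhs, b ∈ st.1.getD j [] := fun b hb => of_decide_eq_true (hm.2 b hb)
    have hGi : pvIsG lhs xs0 i := by
      by_cases hg : pvIsG lhs xs0 i
      · exact hg
      · refine absurd ⟨by omega, fun b hb => ?_⟩ hg
        rcases hUp i b (hmi b hb) with h0 | h0
        · exact h0
        · exact absurd h0.2.1 hg
    have hGj : pvIsG lhs xs0 j := by
      by_cases hg : pvIsG lhs xs0 j
      · exact hg
      · refine absurd ⟨by omega, fun b hb => ?_⟩ hg
        rcases hUp j b (hmj b hb) with h0 | h0
        · exact h0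
        · exact absurd h0.2.1 hg
    have hTwo : pvTwo lhs xs0 := ⟨i, j, hGi, hGj, by omega⟩
    exact pvFoldlPreserve (pvInv lhs rhs xs0 c0) (pvRhsStepM i j) rhs
      (fun s b hb hs => pvRhsStepM_inv lhs rhs xs0 c0 i j (by omega) hGi hGj hTwo b hb s hs)
      st ⟨hLen, hLow, hUp, hFlag⟩
  · exact hInv

-- ===== completeness of the sweep =====

theorem pvRhsStepM_lhsDisj (i j : Nat) (hij : i ≠ j) (st : List (PySem.Set String) × Bool)
    (b a : String) (hj : j < st.1.length) (hi : i < st.1.length)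
    (h : pvMemAt st.1 i a ∨ pvMemAt st.1 j a) :
    pvMemAt (pvRhsStepM i j st b).1 i a ∨ pvMemAt (pvRhsStepM i j st b).1 j a := by
  rcases h with h | h
  · exact Or.inl (pvRhsStepM_mono i j st b i a h)
  · exact Or.inr (pvRhsStepM_mono i j st b j a h)

theorem pvRhsFoldM_complete (i j : Nat) (hij : i ≠ j) (a : String) :
    ∀ (rs : List String) (st : List (PySem.Set String) × Bool),
    a ∈ rs → i < st.1.length → j < st.1.length →
    (pvMemAt st.1 i a ∨ pvMemAt st.1 j a) →
    pvMemAt (rs.foldl (pvRhsStepM i j) st).1 i a ∧ pvMemAt (rs.foldl (pvRhsStepM i j) st).1 j a := by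
  intro rs
  induction rs with
  | nil => intro st h; simp at h
  | cons b bs ih =>
    intro st hmem hi hj hd
    rw [List.foldl_cons]
    by_cases hba : b = a
    · subst hba
      have hboth : pvMemAt (pvRhsStepM i j st b).1 i b ∧ pvMemAt (pvRhsStepM i j st b).1 j b := by
        rw [pvRhsStepM]
        split
        · rename_i hc
          constructor
          · rw [pvMemAt_set_ne _ _ _ _ hij]; exact hc.1
          · rw [pvMemAt_set_self _ _ _ hj, PySem.Set.mem_add]; exact Or.inr rfl
        split
        · rename_i hc2 hc
          constructor
          · rw [pvMemAt_set_self _ _ _ hi, PySem.Set.mem_add]; exact Or.inr rfl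
          · rw [pvMemAt_set_ne _ _ _ _ (Ne.symm hij)]; exact hc.1
        · rename_i hc1 hc2
          rcases hd with hd | hd
          · refine ⟨hd, ?_⟩
            by_cases hx : pvMemAt st.1 j b
            · exact hx
            · exact absurd ⟨hd, hx⟩ hc1
          · refine ⟨?_, hd⟩
            by_cases hx : pvMemAt st.1 i b
            · exact hx
            · exact absurd ⟨hd, hx⟩ hc2
      exact pvFoldlPreserve
        (fun s => pvMemAt s.1 i b ∧ pvMemAt s.1 j b) (pvRhsStepM i j) bs
        (fun s c _ hs => ⟨pvRhsStepM_mono i j s c i b hs.1, pvRhsStepM_mono i j s c j b hs.2⟩)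
        _ hboth
    · have hmem' : a ∈ bs := by
        rcases List.mem_cons.mp hmem with h | h
        · exact absurd h.symm hba
        · exact h
      have hlen := pvRhsStepM_length i j st b
      exact ih (pvRhsStepM i j st b) hmem' (by omega) (by omega)
        (pvRhsStepM_lhsDisj i j hij st b a hj hi hd)

theorem pvPairStepM_complete (lhs rhs : List String) (xs0 : List (PySem.Set String)) (c0 : Bool)
    (st : List (PySem.Set String) × Bool) (hInv : pvInv lhs rhs xs0 c0 st)
    (p q : Nat) (hpq : p < q) (hq : q < st.1.length)
    (hGp : pvIsG lhs xs0 p) (hGq : pvIsG lhs xs0 q) (a : String) (ha : a ∈ rhs)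
    (hd : pvMemAt st.1 p a ∨ pvMemAt st.1 q a) :
    pvMemAt (pvPairStepM lhs rhs st p q).1 p a ∧ pvMemAt (pvPairStepM lhs rhs st p q).1 q a := by
  obtain ⟨hLen, hLow, hUp, hFlag⟩ := hInv
  rw [pvPairStepM]
  rw [if_neg (by omega)]
  have hmatch : (lhs.all (fun b => decide (b ∈ st.1.getD p [])) &&
      lhs.all (fun b => decide (b ∈ st.1.getD q []))) = true := by
    rw [Bool.and_eq_true, List.all_eq_true, List.all_eq_true]
    exact ⟨fun b hb => decide_eq_true (hLow p b (hGp.2 b hb)),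
           fun b hb => decide_eq_true (hLow q b (hGq.2 b hb))⟩
  rw [if_pos hmatch]
  exact pvRhsFoldM_complete p q (by omega) a rhs st ha (by omega) hq hd

theorem pvInv_init (lhs rhs : List String) (xs0 : List (PySem.Set String)) (c0 : Bool) :
    pvInv lhs rhs xs0 c0 (xs0, c0) := by
  refine ⟨rfl, fun r a h => h, fun r a h => Or.inl h, ?_⟩
  constructor
  · intro h; exact Or.inl h
  · rintro (h | ⟨r, a, h1, h2⟩)
    · exact h
    · exact absurd h1 h2

theorem pvOuterStepM_inv (lhs rhs : List String) (xs0 : List (PySem.Set String)) (c0 : Bool)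
    (st : List (PySem.Set String) × Bool) (hInv : pvInv lhs rhs xs0 c0 st) (i : Nat) :
    pvInv lhs rhs xs0 c0
      ((List.range st.1.length).foldl (fun st2 j => pvPairStepM lhs rhs st2 i j) st) := by
  refine pvFoldlPreserve (pvInv lhs rhs xs0 c0) _ (List.range st.1.length) ?_ st hInv
  intro s j hjmem hs
  exact pvPairStepM_inv lhs rhs xs0 c0 s hs i j
    (by rw [hs.1, ← hInv.1]; exact List.mem_range.mp hjmem)

theorem pvOuterStepM_mono (lhs rhs : List String)
    (st : List (PySem.Set String) × Bool) (i : Nat) (r : Nat) (a : String)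
    (h : pvMemAt st.1 r a) :
    pvMemAt (((List.range st.1.length).foldl (fun st2 j => pvPairStepM lhs rhs st2 i j) st)).1 r a := by
  exact pvFoldlPreserve (fun s => pvMemAt s.1 r a) _ (List.range st.1.length)
    (fun s j _ hs => pvPairStepM_mono lhs rhs s i j r a hs) st h

theorem pvFdStepM_inv (lhs rhs : List String) (xs0 : List (PySem.Set String)) (c0 : Bool) :
    pvInv lhs rhs xs0 c0 (pvFdStepM lhs rhs (xs0, c0)) := by
  rw [pvFdStepM]
  refine pvFoldlPreserve (pvInv lhs rhs xs0 c0) _ _ ?_ _ (pvInv_init lhs rhs xs0 c0)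
  intro s i _ hs
  exact pvOuterStepM_inv lhs rhs xs0 c0 s hs i

theorem pvFdStepM_complete (lhs rhs : List String) (xs0 : List (PySem.Set String)) (c0 : Bool)
    (r : Nat) (a : String) (hTwo : pvTwo lhs xs0) (hGr : pvIsG lhs xs0 r)
    (hga : pvGainedP lhs rhs xs0 a) :
    pvMemAt (pvFdStepM lhs rhs (xs0, c0)).1 r a := by
  obtain ⟨harhs, g, hGg, hag⟩ := hga
  by_cases hgr : g = r
  · subst hgr
    exact (pvFdStepM_inv lhs rhs xs0 c0).2.1 g a hag
  · -- r and g are distinct group rows; the pair (min, max) propagates a to r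
    set p := min r g with hp
    set q := max r g with hq
    have hrn := hGr.1
    have hgn := hGg.1
    have hpq : p < q := by omega
    have hqn : q < xs0.length := by omega
    have hGp : pvIsG lhs xs0 p := by
      by_cases hlt : r < g
      · have he : p = r := by omega
        rw [he]; exact hGr
      · have he : p = g := by omega
        rw [he]; exact hGg
    have hGq : pvIsG lhs xs0 q := by
      by_cases hlt : r < g
      · have he : q = g := by omega
        rw [he]; exact hGg
      · have he : q = r := by omega
        rw [he]; exact hGr
    rw [pvFdStepM]
    rcases List.append_of_mem (List.mem_range.mpr (show p < (xs0, c0).1.length from by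
      simpa using (by omega : p < xs0.length))) with ⟨l1, l2, hsplit⟩
    rw [hsplit, List.foldl_append, List.foldl_cons]
    set stB := l1.foldl (fun st1 i => (List.range st1.1.length).foldl
      (fun st2 j => pvPairStepM lhs rhs st2 i j) st1) ((xs0, c0) : List (PySem.Set String) × Bool) with hstB
    have hInvB : pvInv lhs rhs xs0 c0 stB := by
      rw [hstB]
      refine pvFoldlPreserve (pvInv lhs rhs xs0 c0) _ _ ?_ _ (pvInv_init lhs rhs xs0 c0)
      intro s i _ hs
      exact pvOuterStepM_inv lhs rhs xs0 c0 s hs i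
    -- the p-th outer iteration: split its inner loop at j = q
    have hmemres : pvMemAt (((List.range stB.1.length).foldl
        (fun st2 j => pvPairStepM lhs rhs st2 p j) stB)).1 r a := by
      rcases List.append_of_mem (List.mem_range.mpr (show q < stB.1.length from by
        rw [hInvB.1]; exact hqn)) with ⟨m1, m2, hsplit2⟩
      rw [hsplit2, List.foldl_append, List.foldl_cons]
      set stM := m1.foldl (fun st2 j => pvPairStepM lhs rhs st2 p j) stB with hstM
      have hInvM : pvInv lhs rhs xs0 c0 stM := by
        rw [hstM]
        refine pvFoldlPreserve (pvInv lhs rhs xs0 c0) _ _ ?_ _ hInvB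
        intro s j hjm hs
        refine pvPairStepM_inv lhs rhs xs0 c0 s hs p j ?_
        have : j ∈ List.range stB.1.length := by rw [hsplit2]; exact List.mem_append_left _ hjm
        rw [hs.1, ← hInvB.1]
        exact List.mem_range.mp this
      have hdisj : pvMemAt stM.1 p a ∨ pvMemAt stM.1 q a := by
        have hmem : pvMemAt stM.1 g a := hInvM.2.1 g a hag
        by_cases hlt : r < g
        · right
          have he : q = g := by omega
          rw [he]; exact hmem
        · left
          have he : p = g := by omega
          rw [he]; exact hmem
      have hpair := pvPairStepM_complete lhs rhs xs0 c0 stM hInvM p q hpq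
        (by rw [hInvM.1]; exact hqn) hGp hGq a harhs hdisj
      have hra : pvMemAt (pvPairStepM lhs rhs stM p q).1 r a := by
        by_cases hlt : r < g
        · have he : p = r := by omega
          rw [← he]; exact hpair.1
        · have he : q = r := by omega
          rw [← he]; exact hpair.2
      exact pvFoldlPreserve (fun s => pvMemAt s.1 r a) _ m2
        (fun s j _ hs => pvPairStepM_mono lhs rhs s p j r a hs) _ hra
    exact pvFoldlPreserve (fun s => pvMemAt s.1 r a) _ l2
      (fun s i _ hs => pvOuterStepM_mono lhs rhs s i r a hs) _ hmemres

theorem pvFdStepM_spec (lhs rhs : List String) (xs0 : List (PySem.Set String)) (c0 : Bool) :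
    (pvFdStepM lhs rhs (xs0, c0)).1.length = xs0.length ∧
    (∀ (r : Nat) (a : String), pvMemAt (pvFdStepM lhs rhs (xs0, c0)).1 r a ↔
      (pvMemAt xs0 r a ∨ (pvTwo lhs xs0 ∧ pvIsG lhs xs0 r ∧ pvGainedP lhs rhs xs0 a))) ∧
    ((pvFdStepM lhs rhs (xs0, c0)).2 = true ↔
      (c0 = true ∨ (pvTwo lhs xs0 ∧ ∃ (r : Nat) (a : String),
        pvIsG lhs xs0 r ∧ pvGainedP lhs rhs xs0 a ∧ ¬ pvMemAt xs0 r a))) := by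
  obtain ⟨hLen, hLow, hUp, hFlag⟩ := pvFdStepM_inv lhs rhs xs0 c0
  refine ⟨hLen, ?_, ?_⟩
  · intro r a
    constructor
    · intro h
      rcases hUp r a h with h | h
      · exact Or.inl h
      · exact Or.inr h
    · rintro (h | ⟨hTwo, hG, hg⟩)
      · exact hLow r a h
      · exact pvFdStepM_complete lhs rhs xs0 c0 r a hTwo hG hg
  · rw [hFlag]
    constructor
    · rintro (h | ⟨r, a, hm, hnm⟩)
      · exact Or.inl h
      · rcases hUp r a hm with h | ⟨hTwo, hG, hg⟩
        · exact absurd h hnm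
        · exact Or.inr ⟨hTwo, r, a, hG, hg, hnm⟩
    · rintro (h | ⟨hTwo, r, a, hG, hg, hnm⟩)
      · exact Or.inl h
      · exact Or.inr ⟨r, a, pvFdStepM_complete lhs rhs xs0 c0 r a hTwo hG hg, hnm⟩

-- ===== characterization of B's per-FD step =====

theorem pvGroup_mem (lhs : List String) (xs : List (PySem.Set String)) (i : Int) :
    (i ∈ ((PySem.List.enumerate xs 0).filter
        (fun p => lhs.all (fun a => PySem.Set.contains p.2 a))).map (fun p => p.1)) ↔
      ∃ k : Nat, i = (k : Int) ∧ pvIsG lhs xs k := by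
  rw [List.mem_map]
  constructor
  · rintro ⟨p, hp, hp1⟩
    rw [List.mem_filter] at hp
    obtain ⟨hpe, hpall⟩ := hp
    rw [PySem.List.mem_enumerate_iff] at hpe
    obtain ⟨k, hk, hpk⟩ := hpe
    refine ⟨k, by rw [← hp1, hpk]; simp, hk, ?_⟩
    intro a ha
    rw [List.all_eq_true] at hpall
    have := hpall a ha
    rw [PySem.Set.contains_iff] at this
    rw [hpk] at this
    rw [pvMemAt, List.getD_eq_getElem?_getD, List.getElem?_eq_getElem hk]
    exact this
  · rintro ⟨k, hik, hk, hAll⟩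
    refine ⟨((k : Int), xs[k]), ?_, by rw [hik]⟩
    rw [List.mem_filter]
    constructor
    · rw [PySem.List.mem_enumerate_iff]
      exact ⟨k, hk, by simp⟩
    · rw [List.all_eq_true]
      intro a ha
      rw [PySem.Set.contains_iff]
      have := hAll a ha
      rw [pvMemAt, List.getD_eq_getElem?_getD, List.getElem?_eq_getElem hk] at this
      exact this

theorem pvGroup_pairwise (lhs : List String) (xs : List (PySem.Set String)) :
    (((PySem.List.enumerate xs 0).filter
        (fun p => lhs.all (fun a => PySem.Set.contains p.2 a))).map (fun p => p.1)).Pairwise (· < ·) := by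
  rw [List.pairwise_map]
  exact (PySem.List.pairwise_lt_enumerate xs 0).filter _

theorem pvTwoMem_len {α : Type} (l : List α) (x y : α) (hx : x ∈ l) (hy : y ∈ l) (hne : x ≠ y) :
    2 ≤ l.length := by
  cases l with
  | nil => simp at hx
  | cons a t =>
    cases t with
    | nil =>
      simp at hx hy
      rw [hx, hy] at hne
      exact absurd rfl hne
    | cons b t2 =>
      simp only [List.length_cons]
      omega

theorem pvGroup_two (lhs : List String) (xs : List (PySem.Set String)) :
    2 ≤ (((PySem.List.enumerate xs 0).filter
        (fun p => lhs.all (fun a => PySem.Set.contains p.2 a))).map (fun p => p.1)).length ↔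
      pvTwo lhs xs := by
  constructor
  · intro h2
    set gl := ((PySem.List.enumerate xs 0).filter
        (fun p => lhs.all (fun a => PySem.Set.contains p.2 a))).map (fun p => p.1) with hgl
    cases hc : gl with
    | nil => rw [hc] at h2; simp at h2
    | cons i1 t =>
      cases hc2 : t with
      | nil => rw [hc, hc2] at h2; simp at h2
      | cons i2 t2 =>
        have h1 : i1 ∈ gl := by rw [hc]; exact List.mem_cons_self
        have h2' : i2 ∈ gl := by rw [hc, hc2]; exact List.mem_cons_of_mem _ List.mem_cons_self
        have hlt : i1 < i2 := by
          have hpw := pvGroup_pairwise lhs xs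
          rw [← hgl, hc, hc2] at hpw
          exact (List.pairwise_cons.mp hpw).1 i2 List.mem_cons_self
        rw [hgl] at h1 h2'
        rw [pvGroup_mem] at h1 h2'
        obtain ⟨k1, he1, hG1⟩ := h1
        obtain ⟨k2, he2, hG2⟩ := h2'
        exact ⟨k1, k2, hG1, hG2, by omega⟩
  · rintro ⟨r, g, hGr, hGg, hne⟩
    have hr : ((r : Int)) ∈ _ := (pvGroup_mem lhs xs (r : Int)).mpr ⟨r, rfl, hGr⟩
    have hg : ((g : Int)) ∈ _ := (pvGroup_mem lhs xs (g : Int)).mpr ⟨g, rfl, hGg⟩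
    exact pvTwoMem_len _ _ _ hr hg (by omega)

theorem pvGained_mem (lhs rhs : List String) (xs : List (PySem.Set String)) (a : String) :
    a ∈ PySem.Set.ofList (rhs.filter (fun b =>
        (((PySem.List.enumerate xs 0).filter
          (fun p => lhs.all (fun c => PySem.Set.contains p.2 c))).map (fun p => p.1)).any
            (fun i => PySem.Set.contains (PySem.List.pyGetD xs i []) b))) ↔
      pvGainedP lhs rhs xs a := by
  rw [PySem.Set.mem_ofList, List.mem_filter, pvGainedP]
  constructor
  · rintro ⟨ha, hany⟩
    refine ⟨ha, ?_⟩
    rw [List.any_eq_true] at hany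
    obtain ⟨i, hi, hcont⟩ := hany
    rw [pvGroup_mem] at hi
    obtain ⟨k, hik, hGk⟩ := hi
    rw [hik] at hcont
    rw [PySem.Set.contains_iff, PySem.List.pyGetD_natCast] at hcont
    exact ⟨k, hGk, hcont⟩
  · rintro ⟨ha, k, hGk, hmem⟩
    refine ⟨ha, ?_⟩
    rw [List.any_eq_true]
    refine ⟨(k : Int), (pvGroup_mem lhs xs (k : Int)).mpr ⟨k, rfl, hGk⟩, ?_⟩
    rw [PySem.Set.contains_iff, PySem.List.pyGetD_natCast]
    exact hmem

theorem pvFoldB_spec (gained : PySem.Set String) :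
    ∀ (gl : List Int) (st : List (PySem.Set String) × Bool),
    gl.Pairwise (· < ·) →
    (∀ i ∈ gl, ∃ k : Nat, i = (k : Int) ∧ k < st.1.length) →
    ((gl.foldl (fun st2 i =>
        if PySem.Set.issubset gained (PySem.List.pyGetD st2.1 i []) then st2
        else (PySem.List.pySetD st2.1 i (PySem.Set.union (PySem.List.pyGetD st2.1 i []) gained), true)) st)).1.length
        = st.1.length ∧
    (∀ (r : Nat) (a : String),
      pvMemAt ((gl.foldl (fun st2 i =>
        if PySem.Set.issubset gained (PySem.List.pyGetD st2.1 i []) then st2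
        else (PySem.List.pySetD st2.1 i (PySem.Set.union (PySem.List.pyGetD st2.1 i []) gained), true)) st)).1 r a ↔
      (pvMemAt st.1 r a ∨ ((r : Int) ∈ gl ∧ a ∈ gained ∧
        PySem.Set.issubset gained (st.1.getD r []) = false))) ∧
    (((gl.foldl (fun st2 i =>
        if PySem.Set.issubset gained (PySem.List.pyGetD st2.1 i []) then st2
        else (PySem.List.pySetD st2.1 i (PySem.Set.union (PySem.List.pyGetD st2.1 i []) gained), true)) st)).2
      = (st.2 || gl.any (fun i => ! PySem.Set.issubset gained (PySem.List.pyGetD st.1 i [])))) := by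
  intro gl
  induction gl with
  | nil =>
    intro st _ _
    refine ⟨rfl, fun r a => ?_, by simp⟩
    simp
  | cons i t ih =>
    intro st hpw hidx
    obtain ⟨k, hik, hk⟩ := hidx i List.mem_cons_self
    subst hik
    rw [List.foldl_cons]
    rw [PySem.List.pyGetD_natCast]
    by_cases hsub : PySem.Set.issubset gained (st.1.getD k []) = true
    · rw [if_pos hsub]
      obtain ⟨ihL, ihM, ihF⟩ := ih st (List.pairwise_cons.mp hpw).2
        (fun i' hi' => hidx i' (List.mem_cons_of_mem _ hi'))
      refine ⟨ihL, ?_, ?_⟩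
      · intro r a
        rw [ihM r a]
        constructor
        · rintro (h | ⟨hmem, hg, hs⟩)
          · exact Or.inl h
          · exact Or.inr ⟨List.mem_cons_of_mem _ hmem, hg, hs⟩
        · rintro (h | ⟨hmem, hg, hs⟩)
          · exact Or.inl h
          · rcases List.mem_cons.mp hmem with he | he
            · -- r = k: subset is true there, contradiction
              have : r = k := by exact_mod_cast he
              rw [this] at hs
              rw [hsub] at hs
              exact absurd hs (by simp)
            · exact Or.inr ⟨he, hg, hs⟩
      · rw [ihF, List.any_cons]
        rw [PySem.List.pyGetD_natCast, hsub]
        simp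
    · rw [if_neg hsub]
      rw [PySem.List.pySetD_natCast]
      have hlen2 : (st.1.set k (PySem.Set.union (st.1.getD k []) gained)).length = st.1.length := by
        simp
      obtain ⟨ihL, ihM, ihF⟩ := ih (st.1.set k (PySem.Set.union (st.1.getD k []) gained), true)
        (List.pairwise_cons.mp hpw).2
        (fun i' hi' => by
          obtain ⟨k', h1, h2⟩ := hidx i' (List.mem_cons_of_mem _ hi')
          exact ⟨k', h1, by simpa using h2⟩)
      have hknott : ((k : Int)) ∉ t := by
        intro hmem
        have := (List.pairwise_cons.mp hpw).1 _ hmem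
        omega
      refine ⟨by rw [ihL]; simpa using hlen2, ?_, ?_⟩
      · intro r a
        rw [ihM r a]
        by_cases hrk : r = k
        · subst hrk
          constructor
          · rintro (h | ⟨hmem, hg, hs⟩)
            · rw [pvMemAt_set_self _ _ _ hk, PySem.Set.mem_union] at h
              rcases h with h | h
              · exact Or.inl h
              · exact Or.inr ⟨List.mem_cons_self, h, by rw [← Bool.not_eq_true]; exact hsub⟩
            · exact absurd hmem hknott
          · rintro (h | ⟨hmem, hg, hs⟩)
            · left
              rw [pvMemAt_set_self _ _ _ hk, PySem.Set.mem_union]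
              exact Or.inl h
            · left
              rw [pvMemAt_set_self _ _ _ hk, PySem.Set.mem_union]
              exact Or.inr hg
        · have hset : pvMemAt (st.1.set k (PySem.Set.union (st.1.getD k []) gained)) r a ↔ pvMemAt st.1 r a :=
            pvMemAt_set_ne _ _ _ _ hrk a
          have hgetd : (st.1.set k (PySem.Set.union (st.1.getD k []) gained)).getD r [] = st.1.getD r [] := by
            rw [List.getD_eq_getElem?_getD, List.getElem?_set_ne (by omega), ← List.getD_eq_getElem?_getD]
          rw [hset, hgetd]
          constructor
          · rintro (h | ⟨hmem, hg, hs⟩)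
            · exact Or.inl h
            · exact Or.inr ⟨List.mem_cons_of_mem _ hmem, hg, hs⟩
          · rintro (h | ⟨hmem, hg, hs⟩)
            · exact Or.inl h
            · rcases List.mem_cons.mp hmem with he | he
              · exact absurd (by exact_mod_cast he : r = k) hrk
              · exact Or.inr ⟨he, hg, hs⟩
      · rw [ihF]
        simp only [Bool.true_or]
        have hfalse : PySem.Set.issubset gained (st.1.getD k []) = false := by
          rw [← Bool.not_eq_true]; exact hsub
        rw [List.any_cons, PySem.List.pyGetD_natCast, hfalse]
        simp

theorem pvFdStepB_spec (lhs rhs : List String) (xs : List (PySem.Set String)) (c : Bool) :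
    (pvFdStepB (xs, c) (lhs, rhs)).1.length = xs.length ∧
    (∀ (r : Nat) (a : String), pvMemAt (pvFdStepB (xs, c) (lhs, rhs)).1 r a ↔
      (pvMemAt xs r a ∨ (pvTwo lhs xs ∧ pvIsG lhs xs r ∧ pvGainedP lhs rhs xs a))) ∧
    ((pvFdStepB (xs, c) (lhs, rhs)).2 = true ↔
      (c = true ∨ (pvTwo lhs xs ∧ ∃ (r : Nat) (a : String),
        pvIsG lhs xs r ∧ pvGainedP lhs rhs xs a ∧ ¬ pvMemAt xs r a))) := by
  simp only [pvFdStepB]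
  by_cases hguard : 2 ≤ (((PySem.List.enumerate xs 0).filter
      (fun p => lhs.all (fun a => PySem.Set.contains p.2 a))).map (fun p => p.1)).length
  · rw [if_pos hguard]
    have hTwo : pvTwo lhs xs := (pvGroup_two lhs xs).mp hguard
    obtain ⟨hL, hM, hF⟩ := pvFoldB_spec
      (PySem.Set.ofList (rhs.filter (fun b =>
        (((PySem.List.enumerate xs 0).filter
          (fun p => lhs.all (fun c' => PySem.Set.contains p.2 c'))).map (fun p => p.1)).any
            (fun i => PySem.Set.contains (PySem.List.pyGetD xs i []) b))))
      (((PySem.List.enumerate xs 0).filter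
        (fun p => lhs.all (fun a => PySem.Set.contains p.2 a))).map (fun p => p.1))
      (xs, c)
      (pvGroup_pairwise lhs xs)
      (fun i hi => by
        obtain ⟨k, h1, h2⟩ := (pvGroup_mem lhs xs i).mp hi
        exact ⟨k, h1, h2.1⟩)
    refine ⟨hL, ?_, ?_⟩
    · intro r a
      rw [hM r a]
      constructor
      · rintro (h | ⟨hmem, hg, hs⟩)
        · exact Or.inl h
        · obtain ⟨k, hrk, hGk⟩ := (pvGroup_mem lhs xs (r : Int)).mp hmem
          have hrk' : r = k := by exact_mod_cast hrk
          subst hrk'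
          exact Or.inr ⟨hTwo, hGk, (pvGained_mem lhs rhs xs a).mp hg⟩
      · rintro (h | ⟨_, hG, hgp⟩)
        · exact Or.inl h
        · by_cases hsub : PySem.Set.issubset (PySem.Set.ofList (rhs.filter (fun b =>
            (((PySem.List.enumerate xs 0).filter
              (fun p => lhs.all (fun c' => PySem.Set.contains p.2 c'))).map (fun p => p.1)).any
                (fun i => PySem.Set.contains (PySem.List.pyGetD xs i []) b)))) (xs.getD r []) = true
          · left
            rw [PySem.Set.issubset_iff] at hsub
            exact hsub a ((pvGained_mem lhs rhs xs a).mpr hgp)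
          · right
            exact ⟨(pvGroup_mem lhs xs (r : Int)).mpr ⟨r, rfl, hG⟩,
              (pvGained_mem lhs rhs xs a).mpr hgp,
              by rw [← Bool.not_eq_true]; exact hsub⟩
    · rw [hF, Bool.or_eq_true]
      constructor
      · rintro (h | hany)
        · exact Or.inl h
        · rw [List.any_eq_true] at hany
          obtain ⟨i, hi, hni⟩ := hany
          obtain ⟨k, hik, hGk⟩ := (pvGroup_mem lhs xs i).mp hi
          subst hik
          rw [PySem.List.pyGetD_natCast, Bool.not_eq_eq_eq_not, Bool.not_true] at hni
          have : ¬ ∀ x ∈ PySem.Set.ofList (rhs.filter (fun b =>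
              (((PySem.List.enumerate xs 0).filter
                (fun p => lhs.all (fun c' => PySem.Set.contains p.2 c'))).map (fun p => p.1)).any
                  (fun i => PySem.Set.contains (PySem.List.pyGetD xs i []) b))), x ∈ xs.getD k [] := by
            intro hall
            have h2 := (PySem.Set.issubset_iff _ _).mpr hall
            rw [h2] at hni
            exact absurd hni (by simp)
          push_neg at this
          obtain ⟨a, hag, hna⟩ := this
          exact Or.inr ⟨hTwo, k, a, hGk, (pvGained_mem lhs rhs xs a).mp hag, hna⟩
      · rintro (h | ⟨_, r, a, hG, hgp, hnm⟩)
        · exact Or.inl h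
        · right
          rw [List.any_eq_true]
          refine ⟨(r : Int), (pvGroup_mem lhs xs (r : Int)).mpr ⟨r, rfl, hG⟩, ?_⟩
          rw [PySem.List.pyGetD_natCast, Bool.not_eq_eq_eq_not, Bool.not_true, ← Bool.not_eq_true,
            PySem.Set.issubset_iff]
          intro hall
          exact hnm (hall a ((pvGained_mem lhs rhs xs a).mpr hgp))
  · rw [if_neg hguard]
    have hnTwo : ¬ pvTwo lhs xs := fun h => hguard ((pvGroup_two lhs xs).mpr h)
    refine ⟨rfl, ?_, ?_⟩
    · intro r a
      constructor
      · intro h; exact Or.inl h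
      · rintro (h | ⟨hT, _⟩)
        · exact h
        · exact absurd hT hnTwo
    · constructor
      · intro h; exact Or.inl h
      · rintro (h | ⟨hT, _⟩)
        · exact h
        · exact absurd hT hnTwo

-- ===== assembling: per FD, pass, loop, top level =====

theorem pvFdStep_conj (keys lhs rhs : List String)
    (hlhs : ∀ a ∈ lhs, a ∈ keys) (hrhs : ∀ a ∈ rhs, a ∈ keys)
    (xs : List (PySem.Set String)) (c : Bool) :
    pvFdStepA (pvTblG keys 1 xs, c) (lhs, rhs)
      = (pvTblG keys 1 (pvFdStepB (xs, c) (lhs, rhs)).1, (pvFdStepB (xs, c) (lhs, rhs)).2) := by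
  rw [pvFdStepA_conj keys lhs rhs hlhs hrhs xs c]
  obtain ⟨mL, mM, mF⟩ := pvFdStepM_spec lhs rhs xs c
  obtain ⟨bL, bM, bF⟩ := pvFdStepB_spec lhs rhs xs c
  have h1 : pvTblG keys 1 (pvFdStepM lhs rhs (xs, c)).1
      = pvTblG keys 1 (pvFdStepB (xs, c) (lhs, rhs)).1 :=
    pvTblG_congr keys _ _ 1 (by rw [mL, bL]) (fun r a => (mM r a).trans (bM r a).symm)
  have h2 : (pvFdStepM lhs rhs (xs, c)).2 = (pvFdStepB (xs, c) (lhs, rhs)).2 :=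
    Bool.coe_iff_coe.mp (mF.trans bF.symm)
  rw [h1, h2]

theorem pvPass_conj (keys : List String) (FD : List (List String × List String))
    (hFD : ∀ fd ∈ FD, (∀ a ∈ fd.1, a ∈ keys) ∧ (∀ a ∈ fd.2, a ∈ keys)) :
    ∀ (xs : List (PySem.Set String)) (c : Bool),
    FD.foldl pvFdStepA (pvTblG keys 1 xs, c)
      = (pvTblG keys 1 (FD.foldl pvFdStepB (xs, c)).1, (FD.foldl pvFdStepB (xs, c)).2) := by
  induction FD with
  | nil => intro xs c; rfl
  | cons fd fds ih =>
    intro xs c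
    rw [List.foldl_cons, List.foldl_cons]
    obtain ⟨l, r⟩ := fd
    have hfd := hFD (l, r) List.mem_cons_self
    rw [pvFdStep_conj keys l r hfd.1 hfd.2 xs c]
    have := ih (fun fd' hfd' => hFD fd' (List.mem_cons_of_mem _ hfd'))
      (pvFdStepB (xs, c) (l, r)).1 (pvFdStepB (xs, c) (l, r)).2
    simpa using this

theorem pvContains_eq_decide (x : PySem.Set String) (a : String) :
    PySem.Set.contains x a = decide (a ∈ x) := by
  by_cases h : a ∈ x
  · rw [decide_eq_true h, (PySem.Set.contains_iff x a).mpr h]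
  · rw [decide_eq_false h, ← Bool.not_eq_true]
    rw [PySem.Set.contains_iff]
    exact h

theorem pvFull_conj (keys : List String) :
    ∀ (xs : List (PySem.Set String)) (s : Int), 1 ≤ s →
    ((pvTblG keys s xs).any pvFullRowA)
      = (xs.any (fun x => keys.all (fun a => PySem.Set.contains x a))) := by
  intro xs
  induction xs with
  | nil => intro s _; rfl
  | cons x xs ih =>
    intro s hs
    show ((pvRowG keys s x :: pvTblG keys (s+1) xs).any pvFullRowA) = _
    rw [List.any_cons, List.any_cons, ih (s + 1) (by omega), pvFullRowA_rowG keys s hs x]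
    congr 1
    exact pvAllCongrMem keys _ _ (fun a _ => (pvContains_eq_decide x a).symm)

theorem pvLoop_conj (keys : List String) (FD : List (List String × List String))
    (hFD : ∀ fd ∈ FD, (∀ a ∈ fd.1, a ∈ keys) ∧ (∀ a ∈ fd.2, a ∈ keys)) :
    ∀ (fuel : Nat) (xs : List (PySem.Set String)),
    pvLoopA FD fuel (pvTblG keys 1 xs)
      = ((pvLoopB keys FD fuel xs).1, pvTblG keys 1 (pvLoopB keys FD fuel xs).2) := by
  intro fuel
  induction fuel with
  | zero => intro xs; rfl
  | succ f ih =>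
    intro xs
    rw [pvLoopA, pvLoopB]
    rw [pvPass_conj keys FD hFD xs false]
    rw [pvFull_conj keys _ 1 (by omega)]
    by_cases hfull : (FD.foldl pvFdStepB (xs, false)).1.any
        (fun x => keys.all (fun a => PySem.Set.contains x a)) = true
    · rw [if_pos hfull, if_pos hfull]
    · rw [if_neg hfull, if_neg hfull]
      by_cases hch : (FD.foldl pvFdStepB (xs, false)).2 = true
      · rw [if_pos hch, if_pos hch]
        exact ih _
      · rw [if_neg hch, if_neg hch]

theorem pvTableB_items (keys : List String) :
    ∀ (xs : List (PySem.Set String)) (s : Int),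
    (pvTblG keys s xs).map PySem.Dict.items
      = (PySem.List.enumerate xs s).map
          (fun p => keys.map (fun a => (a, if PySem.Set.contains p.2 a then "X" else a ++ PySem.Int.toStr p.1))) := by
  intro xs
  induction xs with
  | nil => intro s; rfl
  | cons x xs ih =>
    intro s
    rw [PySem.List.enumerate_cons]
    show (PySem.Dict.items (pvRowG keys s x)) :: (pvTblG keys (s+1) xs).map PySem.Dict.items = _
    rw [List.map_cons, ih (s + 1)]
    congr 1
    show keys.map _ = keys.map _
    apply List.map_congr_left
    intro a _
    refine congrArg (fun v => (a, v)) (if_congr ?_ rfl rfl)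
    rw [pvContains_eq_decide]
    simp

-- ===== the one-row case: no pair exists, every FD is inert =====

theorem pvFdStepA_small (st : List (PySem.Dict String String) × Bool) (fd : List String × List String)
    (h : st.1.length ≤ 1) : pvFdStepA st fd = st := by
  have h01 : st.1.length = 0 ∨ st.1.length = 1 := by omega
  rcases h01 with h0 | h1
  · rw [pvFdStepA, h0]
    rfl
  · rw [pvFdStepA, h1]
    simp only [List.range_one, List.foldl_cons, List.foldl_nil]
    rw [h1]
    simp only [List.range_one, List.foldl_cons, List.foldl_nil]
    rw [pvPairStepA, if_pos (by omega)]

theorem pvFdStepB_small (st : List (PySem.Set String) × Bool) (fd : List String × List String)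
    (h : st.1.length ≤ 1) : pvFdStepB st fd = st := by
  rw [pvFdStepB]
  rw [if_neg]
  intro h2
  have hle : ((PySem.List.enumerate st.1 0).filter
      (fun p => fd.1.all (fun a => PySem.Set.contains p.2 a))).length ≤ (PySem.List.enumerate st.1 0).length :=
    List.length_filter_le _ _
  rw [List.length_map] at h2
  rw [PySem.List.length_enumerate] at hle
  omega

theorem pvPassA_small (FD : List (List String × List String)) :
    ∀ (st : List (PySem.Dict String String) × Bool), st.1.length ≤ 1 →
    FD.foldl pvFdStepA st = st := by
  induction FD with
  | nil => intro st _; rfl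
  | cons fd fds ih =>
    intro st h
    rw [List.foldl_cons, pvFdStepA_small st fd h, ih st h]

theorem pvPassB_small (FD : List (List String × List String)) :
    ∀ (st : List (PySem.Set String) × Bool), st.1.length ≤ 1 →
    FD.foldl pvFdStepB st = st := by
  induction FD with
  | nil => intro st _; rfl
  | cons fd fds ih =>
    intro st h
    rw [List.foldl_cons, pvFdStepB_small st fd h, ih st h]

theorem pvLoop_conj_small (keys : List String) (FD : List (List String × List String))
    (fuel : Nat) (xs : List (PySem.Set String)) (h : xs.length ≤ 1) :
    pvLoopA FD fuel (pvTblG keys 1 xs)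
      = ((pvLoopB keys FD fuel xs).1, pvTblG keys 1 (pvLoopB keys FD fuel xs).2) := by
  cases fuel with
  | zero => rfl
  | succ f =>
    rw [pvLoopA, pvLoopB]
    rw [pvPassA_small FD (pvTblG keys 1 xs, false) (by rw [pvTblG_length]; exact h),
        pvPassB_small FD (xs, false) h]
    rw [pvFull_conj keys xs 1 (by omega)]
    by_cases hfull : xs.any (fun x => keys.all (fun a => PySem.Set.contains x a)) = true
    · rw [if_pos hfull, if_pos hfull]
    · rw [if_neg hfull, if_neg hfull]
      simp

-- ===== quiet inputs: the table never changes =====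

theorem pvXrowB_mem (keys d : List String) (a : String) :
    a ∈ pvXrowB keys d ↔ a ∈ keys ∧ a ∈ d := by
  rw [pvXrowB, PySem.Set.mem_ofList, List.mem_filter]
  constructor
  · rintro ⟨h1, h2⟩
    exact ⟨h1, of_decide_eq_true h2⟩
  · rintro ⟨h1, h2⟩
    exact ⟨h1, decide_eq_true h2⟩

theorem pvFoldlId {α β : Type} (f : α → β → α) (l : List β) (s : α)
    (h : ∀ x ∈ l, f s x = s) : l.foldl f s = s := by
  induction l with
  | nil => rfl
  | cons x xs ih =>
    rw [List.foldl_cons, h x List.mem_cons_self]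
    exact ih (fun y hy => h y (List.mem_cons_of_mem _ hy))

theorem pvXs0_getD (keys : List String) (decom : List (List String)) (i : Nat)
    (h : i < decom.length) :
    (decom.map (pvXrowB keys)).getD i [] = pvXrowB keys (decom.getD i []) := by
  rw [List.getD_eq_getElem?_getD, List.getD_eq_getElem?_getD,
    List.getElem?_eq_getElem (by simpa using h), List.getElem?_eq_getElem h]
  simp

theorem pvMatch_false_quiet (keys attrs lhs : List String)
    (hkeys : ∀ a : String, a ∈ keys ↔ a ∈ attrs) (decom : List (List String)) (i j : Nat)
    (hij : i < j) (hjn : j < decom.length)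
    (hq : ¬ ∀ a ∈ lhs.takeWhile (fun a => decide (a ∈ attrs)), a ∈ decom.getD i [] ∧ a ∈ decom.getD j []) :
    lhs.all (fun a =>
      (((pvTblG keys 1 (decom.map (pvXrowB keys))).getD i PySem.Dict.empty).getD a "" ==
       ((pvTblG keys 1 (decom.map (pvXrowB keys))).getD j PySem.Dict.empty).getD a "")) = false := by
  push_neg at hq
  obtain ⟨a, hapref, hnd⟩ := hq
  have haattrs : a ∈ attrs := of_decide_eq_true
    (List.mem_takeWhile_imp (p := fun a => decide (a ∈ attrs)) hapref)
  have hakeys : a ∈ keys := (hkeys a).mpr haattrs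
  have halhs : a ∈ lhs := (List.takeWhile_sublist _).mem hapref
  have hin : i < decom.length := by omega
  have hlen : (decom.map (pvXrowB keys)).length = decom.length := by simp
  rw [List.all_eq_false]
  refine ⟨a, halhs, ?_⟩
  rw [pvTblG_getD keys _ 1 i (by omega), pvTblG_getD keys _ 1 j (by omega),
    pvRowG_getD, pvRowG_getD, if_pos hakeys, if_pos hakeys,
    pvXs0_getD keys decom i hin, pvXs0_getD keys decom j hjn]
  have hti : ¬ a ++ PySem.Int.toStr (1 + (i : Int)) = "X" := pvTag_ne_X a _ (by omega)
  have htj : ¬ a ++ PySem.Int.toStr (1 + (j : Int)) = "X" := pvTag_ne_X a _ (by omega)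
  by_cases hdi : a ∈ decom.getD i []
  · have hdj : a ∉ decom.getD j [] := hnd hdi
    rw [if_pos ((pvXrowB_mem keys _ a).mpr ⟨hakeys, hdi⟩),
      if_neg (fun h => hdj ((pvXrowB_mem keys _ a).mp h).2)]
    intro hb
    exact htj (eq_of_beq hb).symm
  · rw [if_neg (fun h => hdi ((pvXrowB_mem keys _ a).mp h).2)]
    by_cases hdj : a ∈ decom.getD j []
    · rw [if_pos ((pvXrowB_mem keys _ a).mpr ⟨hakeys, hdj⟩)]
      intro hb
      exact hti (eq_of_beq hb)
    · rw [if_neg (fun h => hdj ((pvXrowB_mem keys _ a).mp h).2)]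
      intro hb
      exact pvTag_inj a _ _ (by omega) (by omega) (by omega) (eq_of_beq hb)

theorem pvFdStepA_quiet (keys attrs : List String) (hkeys : ∀ a : String, a ∈ keys ↔ a ∈ attrs)
    (decom : List (List String)) (c : Bool) (fd : List String × List String)
    (hq : ∀ i < decom.length, ∀ j < decom.length, i < j →
      ¬ (∀ a ∈ fd.1.takeWhile (fun a => decide (a ∈ attrs)), a ∈ decom.getD i [] ∧ a ∈ decom.getD j [])) :
    pvFdStepA (pvTblG keys 1 (decom.map (pvXrowB keys)), c) fd
      = (pvTblG keys 1 (decom.map (pvXrowB keys)), c) := by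
  rw [pvFdStepA]
  refine pvFoldlId _ _ _ ?_
  intro i _
  refine pvFoldlId _ _ _ ?_
  intro j hj
  have hjn : j < decom.length := by
    have := List.mem_range.mp hj
    rw [pvTblG_length] at this
    simpa using this
  rw [pvPairStepA]
  by_cases hij : j ≤ i
  · rw [if_pos hij]
  · rw [if_neg hij]
    simp only
    by_cases hin : i < decom.length
    · rw [pvMatch_false_quiet keys attrs fd.1 hkeys decom i j (by omega) hjn
        (hq i hin j hjn (by omega))]
      simp
    · exfalso
      omega
  
theorem pvFdStepB_quiet (keys attrs : List String) (hkeys : ∀ a : String, a ∈ keys ↔ a ∈ attrs)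
    (decom : List (List String)) (c : Bool) (fd : List String × List String)
    (hq : ∀ i < decom.length, ∀ j < decom.length, i < j →
      ¬ (∀ a ∈ fd.1.takeWhile (fun a => decide (a ∈ attrs)), a ∈ decom.getD i [] ∧ a ∈ decom.getD j [])) :
    pvFdStepB ((decom.map (pvXrowB keys)), c) fd = ((decom.map (pvXrowB keys)), c) := by
  obtain ⟨l, r⟩ := fd
  rw [pvFdStepB, if_neg]
  intro h2
  have hTwo := (pvGroup_two l (decom.map (pvXrowB keys))).mp h2
  obtain ⟨p, q, hGp, hGq, hne⟩ := hTwo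
  have hmem : ∀ (k : Nat), pvIsG l (decom.map (pvXrowB keys)) k →
      ∀ a ∈ l.takeWhile (fun a => decide (a ∈ attrs)), a ∈ decom.getD k [] := by
    intro k hk a ha
    have halhs : a ∈ l := (List.takeWhile_sublist _).mem ha
    have hkd : k < decom.length := by
      have := hk.1
      simpa using this
    have := hk.2 a halhs
    rw [pvMemAt, pvXs0_getD keys decom k hkd, pvXrowB_mem] at this
    exact this.2
  by_cases hpq : p < q
  · exact hq p (by have := hGp.1; simpa using this) q (by have := hGq.1; simpa using this) hpq
      (fun a ha => ⟨hmem p hGp a ha, hmem q hGq a ha⟩)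
  · have hqp : q < p := by omega
    exact hq q (by have := hGq.1; simpa using this) p (by have := hGp.1; simpa using this) hqp
      (fun a ha => ⟨hmem q hGq a ha, hmem p hGp a ha⟩)

theorem pvLoop_conj_quiet (keys attrs : List String) (hkeys : ∀ a : String, a ∈ keys ↔ a ∈ attrs)
    (FD : List (List String × List String)) (decom : List (List String))
    (hq : pvQuiet attrs FD decom) (fuel : Nat) :
    pvLoopA FD fuel (pvTblG keys 1 (decom.map (pvXrowB keys)))
      = ((pvLoopB keys FD fuel (decom.map (pvXrowB keys))).1,
         pvTblG keys 1 (pvLoopB keys FD fuel (decom.map (pvXrowB keys))).2) := by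
  cases fuel with
  | zero => rfl
  | succ f =>
    rw [pvLoopA, pvLoopB]
    rw [pvFoldlId pvFdStepA FD _ (fun fd hfd => pvFdStepA_quiet keys attrs hkeys decom false fd (hq fd hfd)),
        pvFoldlId pvFdStepB FD _ (fun fd hfd => pvFdStepB_quiet keys attrs hkeys decom false fd (hq fd hfd))]
    rw [pvFull_conj keys _ 1 (by omega)]
    by_cases hfull : (decom.map (pvXrowB keys)).any
        (fun x => keys.all (fun a => PySem.Set.contains x a)) = true
    · rw [if_pos hfull, if_pos hfull]
    · rw [if_neg hfull, if_neg hfull]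
      simp

-- ===== VERDICT (by name: the statement is the Claim_ definition above) =====
theorem lossless_chase_spec : Claim_equal_lossless_chase := by
  intro attrs FD decom _ hpre
  show lossless_chase attrs FD decom = lossless_chase_alt attrs FD decom
  simp only [lossless_chase, lossless_chase_alt]
  rw [show pvTableA (PySem.List.sorted attrs (fun x => x) false) decom
      = pvTblG (pvKeysB attrs) 1 (decom.map (pvXrowB (pvKeysB attrs))) from pvTableA_eq _ decom]
  have hconj : pvLoopA FD (decom.length * attrs.length + 2)
      (pvTblG (pvKeysB attrs) 1 (decom.map (pvXrowB (pvKeysB attrs))))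
      = ((pvLoopB (pvKeysB attrs) FD (decom.length * attrs.length + 2) (decom.map (pvXrowB (pvKeysB attrs)))).1,
         pvTblG (pvKeysB attrs) 1 (pvLoopB (pvKeysB attrs) FD (decom.length * attrs.length + 2) (decom.map (pvXrowB (pvKeysB attrs)))).2) := by
    have hkeys : ∀ a : String, a ∈ pvKeysB attrs ↔ a ∈ attrs := by
      intro a
      rw [pvKeysB, PySem.List.mem_dedup, PySem.List.mem_sorted]
    rcases hpre with hsmall | hpre' | hquiet
    · exact pvLoop_conj_small (pvKeysB attrs) FD _ _ (by simpa using hsmall)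
    · have hFD : ∀ fd ∈ FD, (∀ a ∈ fd.1, a ∈ pvKeysB attrs) ∧ (∀ a ∈ fd.2, a ∈ pvKeysB attrs) := by
        intro fd hfd
        have h := hpre' fd hfd
        constructor
        · intro a ha
          exact (hkeys a).mpr (h.1 a ha)
        · intro a ha
          exact (hkeys a).mpr (h.2 a ha)
      exact pvLoop_conj (pvKeysB attrs) FD hFD _ _
    · exact pvLoop_conj_quiet (pvKeysB attrs) attrs hkeys FD decom hquiet _
  rw [hconj, pvTableB_items]
  rfl
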